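-- pv_equiv track=rewrite | github.com/seohyun-j/Algorithm | Programmers/Level_3/76503.py | solution
-- ===== SOURCE A (Python) =====
-- from collections import deque
--
-- def bfs(a, edges):
--     graph = {}
--
--     for u, v in edges:
--         if u not in graph:
--             graph[u] = deque()
--         if v not in graph:
--             graph[v] = deque()
--
--         graph[u].append(v)
--         graph[v].append(u)
--
--     root = min(graph.keys(), key=lambda x: len(graph[x]))
--
--     visited = [False] * len(a)
--     visited[root] = True
--     visited[graph[root][0]] = True
--
--     queue = deque()
--     queue.append((root, graph[root].popleft()))
--     path = []
--
--     while queue: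
--         top, bottom = queue.popleft()
--         path.append((top, bottom))
--
--         for i in graph[bottom]:
--             if not visited[i]:
--                 queue.append((bottom, i))
--                 visited[i] = True
--
--     return root, path[::-1]
--
-- def solution(a, edges):
--     answer = 0
--
--     if sum(a) != 0:
--         return -1
--
--     root, path = bfs(a, edges)
--
--     for nex, pre in path:
--         val = a[pre]
--         answer += abs(val)
--         a[pre] += -1 * val
--         a[nex] += val
--
--     return answer
-- ===== SOURCE B (Python) =====
-- from collections import deque
--
-- def solution(a, edges):
--     if sum(a) != 0:
--         return -1
--
--     graph = {}
--     for u, v in edges: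
--         graph.setdefault(u, []).append(v)
--         graph.setdefault(v, []).append(u)
--
--     root = min(graph, key=lambda x: len(graph[x]))
--     first = graph[root][0]
--
--     seen = {root, first}
--     queue = deque([(root, first)])
--     pairs = []
--     while queue:
--         top, bottom = queue.popleft()
--         pairs.append((top, bottom))
--         for nb in graph[bottom]:
--             if nb not in seen:
--                 seen.add(nb)
--                 queue.append((bottom, nb))
--
--     children = {}
--     for p, c in pairs:
--         children.setdefault(p, []).append(c)
--
--     # one pass: iterative post-order DFS over the discovery forest
--     answer = 0
--     stack = [(root, root, True)]
--     while stack: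
--         parent, node, enter = stack.pop()
--         if enter:
--             stack.append((parent, node, False))
--             for c in children.get(node, []):
--                 stack.append((node, c, True))
--         else:
--             if node != root:
--                 answer += abs(a[node])
--                 a[parent] += a[node]
--                 a[node] = 0
--     return answer
-- ===== Notes on version B (the rewrite author's own statement) =====
-- stated objective: alternative
-- what changed: The reversed-BFS-path two-pass aggregation (build path list, reverse it, then sweep it mutating a) is replaced by an explicit-stack post-order DFS over the discovery forest: each node's value is folded into its parent the moment the node is finished, so the path list and its reversal disappear.
-- outside the precondition, e.g. on solution([0], [[0, 0]]): A returns 0, B does not finish within the time limit; on solution([2, -2], [[0, 1], [-1, 0], [0, 1], [1, -2], [1, -1]]): A returns 2, B returns 6; on solution([0, 0, 0], [[0, 1], [5, 6]]): A returns 0, B returns 0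
import Mathlib
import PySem

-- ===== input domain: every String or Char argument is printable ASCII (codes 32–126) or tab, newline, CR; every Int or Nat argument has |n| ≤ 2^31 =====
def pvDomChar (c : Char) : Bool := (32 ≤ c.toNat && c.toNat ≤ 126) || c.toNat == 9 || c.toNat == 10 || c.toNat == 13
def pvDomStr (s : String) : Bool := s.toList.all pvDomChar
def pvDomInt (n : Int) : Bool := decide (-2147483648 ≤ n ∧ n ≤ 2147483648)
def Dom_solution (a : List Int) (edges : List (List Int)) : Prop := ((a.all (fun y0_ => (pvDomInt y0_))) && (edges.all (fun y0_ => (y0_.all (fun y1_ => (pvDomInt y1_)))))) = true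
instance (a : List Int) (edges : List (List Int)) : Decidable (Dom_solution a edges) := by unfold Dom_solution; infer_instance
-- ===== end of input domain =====

-- B replaces A's reversed-BFS-path second pass by a one-pass explicit-stack post-order DFS
-- over the discovery forest (objective: alternative decomposition, same asymptotic cost).
-- Both Pythons mutate `a` in place identically on the admitted inputs; the theorems below
-- are about the RETURN value.

-- ===== PORT A =====

/-- `graph.get(k, [])`-style read; A's adjacency lists (deques) as Lean lists. -/
def getAdj (g : PySem.Dict Int (List Int)) (k : Int) : List Int := g.getD k []

/-- the `for u, v in edges` graph-building loop of A (`if u not in graph: ...` then appends). -/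
def buildGraphA (edges : List (List Int)) : PySem.Dict Int (List Int) :=
  edges.foldl (fun g e =>
    match e with
    | [u, v] =>
      let g1 := if g.contains u then g else g.insert u []
      let g2 := if g1.contains v then g1 else g1.insert v []
      let g3 := g2.insert u (getAdj g2 u ++ [v])
      g3.insert v (getAdj g3 v ++ [u])
    | _ => g) PySem.Dict.empty

/-- `min(graph.keys(), key=lambda x: len(graph[x]))` — Python's min keeps the first
    minimizer.  (Both Pythons contain this same expression; Python raises ValueError on an
    empty dict, excluded by `Pre_solution`.) -/
def minDegKey (g : PySem.Dict Int (List Int)) : Int :=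
  match g.keys with
  | [] => 0
  | k :: ks => ks.foldl (fun best x =>
      if (getAdj g x).length < (getAdj g best).length then x else best) k

/-- A's BFS `while queue:` loop.  `visited[i]` is read/written with `.getD i.toNat`/`.set
    i.toNat`, exact for `0 ≤ i < len(a)` which `Pre_solution` guarantees for every touched
    node (outside it Python raises IndexError or wraps a negative index).  The fuel is a
    totality guard only; `len(a) + 1` iterations are proved sufficient on `Pre_solution`. -/
def bfsLoopA (g : PySem.Dict Int (List Int)) :
    Nat → List Bool → List (Int × Int) → List (Int × Int) → List (Int × Int)
  | 0, _, _, path => path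
  | fuel+1, visited, queue, path =>
    match queue with
    | [] => path
    | (top, bottom) :: rest =>
      let path' := path ++ [(top, bottom)]
      let st := (getAdj g bottom).foldl
        (fun (s : List Bool × List (Int × Int)) i =>
          if !(s.1.getD i.toNat false) then (s.1.set i.toNat true, s.2 ++ [(bottom, i)])
          else s)
        (visited, rest)
      bfsLoopA g fuel st.1 st.2 path'

/-- A's `bfs` helper: returns `(root, path[::-1])`. -/
def bfsA (a : List Int) (edges : List (List Int)) : Int × List (Int × Int) :=
  let graph := buildGraphA edges
  let root := minDegKey graph
  let first := (getAdj graph root).headD 0     -- graph[root][0] (nonempty under Pre_)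
  let visited0 := ((List.replicate a.length false).set root.toNat true).set first.toNat true
  let graph' := graph.insert root (getAdj graph root).tail   -- graph[root].popleft()
  let path := bfsLoopA graph' (a.length + 1) visited0 [(root, first)] []
  (root, path.reverse)

/-- Port of A.  `a[pre]`/`a[nex]` accesses are exact for in-range indices (`Pre_solution`). -/
def solution (a : List Int) (edges : List (List Int)) : Int :=
  if a.sum ≠ 0 then -1
  else
    let rp := bfsA a edges
    let st := rp.2.foldl
      (fun (s : Int × List Int) pr =>
        let val := s.2.getD pr.2.toNat 0
        (s.1 + |val|,
          (s.2.modify pr.2.toNat (· + (-1 * val))).modify pr.1.toNat (· + val)))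
      (0, a)
    st.1

-- ===== PORT B =====

/-- B's `graph.setdefault(u, []).append(v)` building loop. -/
def buildGraphB (edges : List (List Int)) : PySem.Dict Int (List Int) :=
  edges.foldl (fun g e =>
    match e with
    | [u, v] =>
      let g1 := g.insert u (g.getD u [] ++ [v])
      g1.insert v (g1.getD v [] ++ [u])
    | _ => g) PySem.Dict.empty

/-- B's BFS loop: `seen` is a Python set, and the discovered `(top, bottom)` pairs are
    collected.  Fuel as in `bfsLoopA`. -/
def bfsLoopB (g : PySem.Dict Int (List Int)) :
    Nat → PySem.Set Int → List (Int × Int) → List (Int × Int) → List (Int × Int)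
  | 0, _, _, pairs => pairs
  | fuel+1, seen, queue, pairs =>
    match queue with
    | [] => pairs
    | (top, bottom) :: rest =>
      let pairs' := pairs ++ [(top, bottom)]
      let st := (getAdj g bottom).foldl
        (fun (s : PySem.Set Int × List (Int × Int)) nb =>
          if s.1.contains nb then s else (s.1.add nb, s.2 ++ [(bottom, nb)]))
        (seen, rest)
      bfsLoopB g fuel st.1 st.2 pairs'

/-- `children = {}; for p, c in pairs: children.setdefault(p, []).append(c)`. -/
def buildChildren (pairs : List (Int × Int)) : PySem.Dict Int (List Int) :=
  pairs.foldl (fun d pr => d.insert pr.1 (d.getD pr.1 [] ++ [pr.2])) PySem.Dict.empty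

/-- B's explicit-stack post-order DFS (`stack.pop()` = our list head; pushing the children
    left-to-right so the LAST child is popped first, as in Python).  Array accesses exact on
    in-range indices as above; the fuel is a totality guard, sufficient on `Pre_solution`. -/
def dfsLoopB (children : PySem.Dict Int (List Int)) (root : Int) :
    Nat → List (Int × Int × Bool) → Int × List Int → Int × List Int
  | 0, _, s => s
  | fuel+1, stack, s =>
    match stack with
    | [] => s
    | (parent, node, enter) :: rest =>
      if enter then
        dfsLoopB children root fuel
          ((children.getD node []).foldl (fun st c => (node, c, true) :: st)
            ((parent, node, false) :: rest)) s
      else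
        dfsLoopB children root fuel rest
          (if node ≠ root then
            (s.1 + |s.2.getD node.toNat 0|,
              (s.2.modify parent.toNat (· + s.2.getD node.toNat 0)).set node.toNat 0)
          else s)

/-- Port of B. -/
def solution_alt (a : List Int) (edges : List (List Int)) : Int :=
  if a.sum ≠ 0 then -1
  else
    let graph := buildGraphB edges
    let root := minDegKey graph
    let first := (getAdj graph root).headD 0
    let pairs := bfsLoopB graph (a.length + 1)
      (PySem.Set.add (PySem.Set.add PySem.Set.empty root) first) [(root, first)] []
    let children := buildChildren pairs
    let st := dfsLoopB children root (2 * a.length + 2) [(root, root, true)] (0, a)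
    st.1

-- ===== PRECONDITION & SPEC =====

/-- An edge row `[u, v]` with both endpoints real node ids and no self-loop. -/
def edgeOK (n : Int) (e : List Int) : Bool :=
  match e with
  | [u, v] => decide (0 ≤ u) && decide (u < n) && decide (0 ≤ v) && decide (v < n) && decide (u ≠ v)
  | _ => false

-- Pre_ excludes (besides the inputs where A raises: zero-sum input with an empty edge list,
-- an edge row that is not a pair, a touched node id outside range(len(a))) the zero-sum
-- inputs with self-loop edges or negative node ids, which lie outside the task's tree
-- domain: there A's value is an accident of Python index wraparound / of counting the root
-- against itself, and B's parent-skip DFS need not terminate on a self-loop.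
def Pre_solution (a : List Int) (edges : List (List Int)) : Prop :=
  a.sum ≠ 0 ∨ (edges ≠ [] ∧ ∀ e ∈ edges, edgeOK (a.length : Int) e = true)

instance (a : List Int) (edges : List (List Int)) : Decidable (Pre_solution a edges) := by
  unfold Pre_solution; infer_instance

def pvWitness_solution : List Int × List (List Int) := ([1, -1], [[0, 1]])

def Spec_solution (a : List Int) (edges : List (List Int)) (out : Int) : Prop :=
  out = solution_alt a edges
instance (a : List Int) (edges : List (List Int)) (out : Int) :
    Decidable (Spec_solution a edges out) := by unfold Spec_solution; infer_instance

-- ===== CLAIM (what is proved, stated in full; the proofs are below) =====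
def Claim_equal_solution : Prop := ∀ (a : List Int) (edges : List (List Int)),
  Dom_solution a edges → Pre_solution a edges → Spec_solution a edges (solution a edges)


-- ===== LEMMAS AND PROOFS =====

-- ---------- generic helpers ----------

/-- `0 ≤ x < n` (`InR'` takes the length as a `Nat`). -/
def InR' (n : Nat) (x : Int) : Prop := 0 ≤ x ∧ x < (n : Int)


theorem foldl_cons_eq_reverse_map {α β : Type} (l : List α) (f : α → β) (init : List β) :
    l.foldl (fun s c => f c :: s) init = l.reverse.map f ++ init := by
  induction l generalizing init with
  | nil => simp
  | cons c l ih => simp [List.foldl_cons, ih]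

theorem getD_set_int (l : List Int) (x y : Int) (v : Int)
    (hx : 0 ≤ x) (hxl : x.toNat < l.length) (hy : 0 ≤ y) (hyl : y.toNat < l.length) :
    (l.set x.toNat v).getD y.toNat 0 = if y = x then v else l.getD y.toNat 0 := by
  by_cases h : y = x
  · subst h
    simp [List.getD_eq_getElem?_getD, List.getElem?_set, hxl]
  · have hne : x.toNat ≠ y.toNat := by omega
    simp [List.getD_eq_getElem?_getD, List.getElem?_set, hne, h]

theorem getD_set_poly {α : Type} (l : List α) (x y : Int) (v d0 : α)
    (hx : 0 ≤ x) (hxl : x.toNat < l.length) (hy : 0 ≤ y) (hyl : y.toNat < l.length) :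
    (l.set x.toNat v).getD y.toNat d0 = if y = x then v else l.getD y.toNat d0 := by
  by_cases h : y = x
  · subst h
    simp [List.getD_eq_getElem?_getD, List.getElem?_set, hxl]
  · have hne : x.toNat ≠ y.toNat := by omega
    simp [List.getD_eq_getElem?_getD, List.getElem?_set, hne, h]

theorem getD_modify_int (l : List Int) (x y : Int) (g : Int → Int)
    (hx : 0 ≤ x) (hxl : x.toNat < l.length) (hy : 0 ≤ y) (hyl : y.toNat < l.length) :
    (l.modify x.toNat g).getD y.toNat 0 =
      if y = x then g (l.getD y.toNat 0) else l.getD y.toNat 0 := by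
  obtain ⟨w, hw⟩ : ∃ w, l[y.toNat]? = some w :=
    ⟨l[y.toNat]'hyl, List.getElem?_eq_getElem hyl⟩
  by_cases h : y = x
  · subst h
    simp [List.getD_eq_getElem?_getD, List.getElem?_modify, hw]
  · have hne : x.toNat ≠ y.toNat := by omega
    simp [List.getD_eq_getElem?_getD, List.getElem?_modify, hw, hne, h]

theorem nodup_length_le_of_inR (n : Nat) (l : List Int) (hnd : l.Nodup)
    (hr : ∀ x ∈ l, InR' n x) : l.length ≤ n := by
  have hmapnd : (l.map Int.toNat).Nodup := by
    refine List.Nodup.map_on ?_ hnd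
    intro x hx y hy hxy
    have := (hr x hx).1; have := (hr y hy).1; omega
  have hsub : l.map Int.toNat ⊆ List.range n := by
    intro m hm
    obtain ⟨x, hx, rfl⟩ := List.mem_map.1 hm
    have := (hr x hx).1; have := (hr x hx).2
    simp only [List.mem_range]; omega
  have := (List.subperm_of_subset hmapnd hsub).length_le
  simpa using this

-- ---------- abstract fold layer ----------

/-- one aggregation step on the abstract state (running answer, array-as-function). -/
def stepF (s : Int × (Int → Int)) (pr : Int × Int) : Int × (Int → Int) :=
  (s.1 + |s.2 pr.2|,
   fun z => if z = pr.2 then 0 else if z = pr.1 then s.2 pr.1 + s.2 pr.2 else s.2 z)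

def OkPair (x y : Int × Int) : Prop := x.2 ≠ y.1 ∧ x.2 ≠ y.2

/-- a processing order is valid when no child reappears later as a parent or child
    and no pair is a self-loop. -/
def ValidL (L : List (Int × Int)) : Prop := L.Pairwise OkPair ∧ ∀ pr ∈ L, pr.1 ≠ pr.2

theorem stepF_comm (s : Int × (Int → Int)) (e y : Int × Int)
    (h1 : e.2 ≠ y.1) (h2 : e.2 ≠ y.2) (h3 : y.2 ≠ e.1)
    (he : e.1 ≠ e.2) (hy : y.1 ≠ y.2) :
    stepF (stepF s e) y = stepF (stepF s y) e := by
  obtain ⟨p, c⟩ := e; obtain ⟨q, d⟩ := y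
  simp only at h1 h2 h3 he hy
  have hdc : d ≠ c := fun h => h2 h.symm
  have hcd : c ≠ d := h2
  have hcq : c ≠ q := h1
  have hdp : d ≠ p := h3
  refine Prod.ext ?_ ?_
  · simp only [stepF]
    rw [show (if d = c then (0:Int) else if d = p then s.2 p + s.2 c else s.2 d) = s.2 d by
          rw [if_neg hdc, if_neg hdp],
        show (if c = d then (0:Int) else if c = q then s.2 q + s.2 d else s.2 c) = s.2 c by
          rw [if_neg hcd, if_neg hcq]]
    ring
  · have hpc : p ≠ c := he
    have hpd : p ≠ d := Ne.symm hdp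
    have hqc : q ≠ c := Ne.symm hcq
    have hqd : q ≠ d := hy
    funext z
    by_cases hzd : z = d
    · subst hzd; simp [stepF, hdc, hdp]
    · by_cases hzc : z = c
      · subst hzc; simp [stepF, hcd, hcq, hzd]
      · by_cases hzq : z = q
        · subst hzq
          by_cases hqp : z = p
          · subst hqp
            simp only [stepF, if_neg hzd, if_neg hzc, if_pos rfl, if_neg hdc, if_neg hdp,
              if_neg hcd, if_neg hcq, if_true]
            ring
          · simp [stepF, hzd, hzc, hqp, hdc, hdp]
        · by_cases hzp : z = p
          · subst hzp
            simp [stepF, hzd, hzc, hzq, hpc, hpd, hcd, hcq]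
          · simp [stepF, hzd, hzc, hzq, hzp]

theorem foldl_pull_back (e : Int × Int) :
    ∀ (Y : List (Int × Int)) (s : Int × (Int → Int)),
    (∀ y ∈ Y, e.2 ≠ y.1 ∧ e.2 ≠ y.2 ∧ y.2 ≠ e.1 ∧ y.1 ≠ y.2) → e.1 ≠ e.2 →
    (e :: Y).foldl stepF s = (Y ++ [e]).foldl stepF s := by
  intro Y
  induction Y with
  | nil => intro s _ _; rfl
  | cons y Y ih =>
    intro s h he
    obtain ⟨h1, h2, h3, hy⟩ := h y (by simp)
    have hcomm := stepF_comm s e y h1 h2 h3 he hy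
    calc (e :: y :: Y).foldl stepF s = Y.foldl stepF (stepF (stepF s e) y) := rfl
      _ = Y.foldl stepF (stepF (stepF s y) e) := by rw [hcomm]
      _ = (e :: Y).foldl stepF (stepF s y) := rfl
      _ = (Y ++ [e]).foldl stepF (stepF s y) :=
          ih (stepF s y) (fun z hz => h z (by simp [hz])) he
      _ = ((y :: Y) ++ [e]).foldl stepF s := rfl

theorem foldl_stepF_perm_valid :
    ∀ (L1 L2 : List (Int × Int)) (s : Int × (Int → Int)),
    ValidL L1 → ValidL L2 → L1.Perm L2 →
    L1.foldl stepF s = L2.foldl stepF s := by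
  suffices h : ∀ (N : Nat) (L1 L2 : List (Int × Int)) (s : Int × (Int → Int)),
      L1.length ≤ N → ValidL L1 → ValidL L2 → L1.Perm L2 →
      L1.foldl stepF s = L2.foldl stepF s by
    exact fun L1 L2 s h1 h2 hp => h L1.length L1 L2 s le_rfl h1 h2 hp
  intro N
  induction N with
  | zero =>
    intro L1 L2 s hlen _ _ hp
    have h1 : L1 = [] := List.eq_nil_of_length_eq_zero (Nat.le_zero.1 hlen)
    subst h1
    rw [hp.nil_eq]
  | succ N ih =>
    intro L1 L2 s hlen hv1 hv2 hp
    rcases List.eq_nil_or_concat L1 with rfl | ⟨M, e, rfl⟩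
    · rw [hp.nil_eq]
    · simp only [List.concat_eq_append] at hlen hv1 hp ⊢
      have heL2 : e ∈ L2 := hp.mem_iff.1 (by simp)
      obtain ⟨X, Y, rfl⟩ := List.append_of_mem heL2
      -- conditions to move e to the back of X ++ e :: Y
      have hpw2 : (X ++ e :: Y).Pairwise OkPair := hv2.1
      have heY : ∀ y ∈ Y, OkPair e y := by
        have := (List.pairwise_append.1 hpw2).2.1
        exact (List.pairwise_cons.1 this).1
      have hME : (M ++ [e]).Pairwise OkPair := hv1.1
      have hMe : ∀ m ∈ M, OkPair m e := by
        have := (List.pairwise_append.1 hME).2.2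
        intro m hm; exact this m hm e (by simp)
      have he : e.1 ≠ e.2 := hv1.2 e (by simp)
      have hYM : ∀ y ∈ Y, y ∈ M := by
        intro y hy
        have hok := heY y hy
        have hyne : y ≠ e := by
          intro h; exact hok.2 (by rw [h])
        have hyL1 : y ∈ M ++ [e] := hp.mem_iff.2 (by simp [hy])
        rcases List.mem_append.1 hyL1 with h | h
        · exact h
        · exact absurd (List.mem_singleton.1 h) hyne
      have hcond : ∀ y ∈ Y, e.2 ≠ y.1 ∧ e.2 ≠ y.2 ∧ y.2 ≠ e.1 ∧ y.1 ≠ y.2 := by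
        intro y hy
        refine ⟨(heY y hy).1, (heY y hy).2, (hMe y (hYM y hy)).1, ?_⟩
        exact hv2.2 y (by simp [hy])
      -- fold over L2 = fold over X ++ Y ++ [e]
      have hL2 : (X ++ e :: Y).foldl stepF s = ((X ++ Y) ++ [e]).foldl stepF s := by
        calc (X ++ e :: Y).foldl stepF s
            = (e :: Y).foldl stepF (X.foldl stepF s) := List.foldl_append
          _ = (Y ++ [e]).foldl stepF (X.foldl stepF s) :=
              foldl_pull_back e Y (X.foldl stepF s) hcond he
          _ = ((X ++ Y) ++ [e]).foldl stepF s := by simp [List.foldl_append]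
      -- M ~ X ++ Y
      have hperm : M.Perm (X ++ Y) := by
        have h1 : (M ++ [e]).Perm (e :: M) := by
          simpa using List.perm_append_singleton e M
        have h2 : (X ++ e :: Y).Perm (e :: (X ++ Y)) := List.perm_middle
        exact (h1.symm.trans (hp.trans h2)).cons_inv
      have hvM : ValidL M := by
        refine ⟨(List.pairwise_append.1 hME).1, fun pr hpr => hv1.2 pr (by simp [hpr])⟩
      have hvXY : ValidL (X ++ Y) := by
        constructor
        · have hx := (List.pairwise_append.1 hpw2).1
          have hy := (List.pairwise_cons.1 (List.pairwise_append.1 hpw2).2.1).2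
          refine List.pairwise_append.2 ⟨hx, hy, ?_⟩
          intro a ha b hb
          exact (List.pairwise_append.1 hpw2).2.2 a ha b (by simp [hb])
        · intro pr hpr
          exact hv2.2 pr (by rcases List.mem_append.1 hpr with h | h <;> simp [h])
      have hlenM : M.length ≤ N := by
        have := hlen; simp at this; omega
      have hIH := ih M (X ++ Y) s hlenM hvM hvXY hperm
      rw [hL2]
      simp only [List.foldl_append]
      rw [hIH, List.foldl_append]

-- ---------- the two ports build the same graph (as read through keys/getAdj) ----------

theorem getD_ensure (g : PySem.Dict Int (List Int)) (k x : Int) :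
    ((if g.contains k then g else g.insert k ([] : List Int))).getD x [] = g.getD x [] := by
  by_cases hc : g.contains k
  · simp [hc]
  · simp only [hc, if_false, Bool.false_eq_true]
    rw [PySem.Dict.getD_insert]
    split_ifs with h
    · subst h
      exact (PySem.Dict.getD_of_not_contains g [] (by simpa using hc)).symm
    · rfl

theorem keys_insert_ite (d : PySem.Dict Int (List Int)) (k : Int) (v : List Int) :
    (d.insert k v).keys = d.keys ++ (if d.contains k then [] else [k]) := by
  by_cases hc : d.contains k
  · simp [hc, PySem.Dict.keys_insert_of_contains d v hc]
  · simp only [hc, if_false, Bool.false_eq_true, if_neg]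
    exact PySem.Dict.keys_insert_of_not_contains d v (by simpa using hc)

theorem build_step_eq (g h : PySem.Dict Int (List Int)) (u v : Int)
    (hk : g.keys = h.keys) (hd : ∀ k, g.getD k [] = h.getD k []) :
    (let g1 := if g.contains u then g else g.insert u []
     let g2 := if g1.contains v then g1 else g1.insert v []
     let g3 := g2.insert u (getAdj g2 u ++ [v])
     g3.insert v (getAdj g3 v ++ [u])).keys =
      (let b1 := h.insert u (h.getD u [] ++ [v])
       b1.insert v (b1.getD v [] ++ [u])).keys ∧
    ∀ k, (let g1 := if g.contains u then g else g.insert u []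
          let g2 := if g1.contains v then g1 else g1.insert v []
          let g3 := g2.insert u (getAdj g2 u ++ [v])
          g3.insert v (getAdj g3 v ++ [u])).getD k [] =
      (let b1 := h.insert u (h.getD u [] ++ [v])
       b1.insert v (b1.getD v [] ++ [u])).getD k [] := by
  have hcont : ∀ x, g.contains x = h.contains x := by
    intro x
    rw [PySem.Dict.contains_eq_decide_mem_keys, PySem.Dict.contains_eq_decide_mem_keys, hk]
  constructor
  · by_cases hvu : v = u
    · subst hvu
      by_cases hcu : g.contains v
      · have hcu' : h.contains v = true := by rw [← hcont]; exact hcu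
        simp [hcu, hcu', keys_insert_ite, PySem.Dict.contains_insert, hk]
      · have gcu : g.contains v = false := by simpa using hcu
        have hcu' : h.contains v = false := by rw [← hcont]; exact gcu
        simp [gcu, hcu', keys_insert_ite, PySem.Dict.contains_insert, hk]
    · by_cases hcu : g.contains u <;> by_cases hcv : g.contains v
      · have hcu' : h.contains u = true := by rw [← hcont]; exact hcu
        have hcv' : h.contains v = true := by rw [← hcont]; exact hcv
        simp [hcu, hcv, hcu', hcv', hvu, keys_insert_ite, PySem.Dict.contains_insert, hk]
      · have gcv : g.contains v = false := by simpa using hcv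
        have hcu' : h.contains u = true := by rw [← hcont]; exact hcu
        have hcv' : h.contains v = false := by rw [← hcont]; exact gcv
        simp [hcu, gcv, hcu', hcv', hvu, keys_insert_ite, PySem.Dict.contains_insert, hk]
      · have gcu : g.contains u = false := by simpa using hcu
        have hcu' : h.contains u = false := by rw [← hcont]; exact gcu
        have hcv' : h.contains v = true := by rw [← hcont]; exact hcv
        simp [gcu, hcv, hcu', hcv', hvu, keys_insert_ite, PySem.Dict.contains_insert, hk]
      · have gcu : g.contains u = false := by simpa using hcu
        have gcv : g.contains v = false := by simpa using hcv
        have hcu' : h.contains u = false := by rw [← hcont]; exact gcu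
        have hcv' : h.contains v = false := by rw [← hcont]; exact gcv
        simp [gcu, gcv, hcu', hcv', hvu, keys_insert_ite, PySem.Dict.contains_insert, hk]
  · intro k
    simp only [getAdj, PySem.Dict.getD_insert, getD_ensure, hd]

/-- A's graph-building step (proof-side name for the loop body of `buildGraphA`). -/
def stepG (g : PySem.Dict Int (List Int)) (u v : Int) : PySem.Dict Int (List Int) :=
  let g1 := if g.contains u then g else g.insert u []
  let g2 := if g1.contains v then g1 else g1.insert v []
  let g3 := g2.insert u (getAdj g2 u ++ [v])
  g3.insert v (getAdj g3 v ++ [u])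

/-- B's graph-building step. -/
def stepH (h : PySem.Dict Int (List Int)) (u v : Int) : PySem.Dict Int (List Int) :=
  let b1 := h.insert u (h.getD u [] ++ [v])
  b1.insert v (b1.getD v [] ++ [u])

theorem buildGraphA_eq_foldl (edges : List (List Int)) :
    buildGraphA edges = edges.foldl (fun g e =>
      match e with
      | [u, v] => stepG g u v
      | _ => g) PySem.Dict.empty := rfl

theorem buildGraphB_eq_foldl (edges : List (List Int)) :
    buildGraphB edges = edges.foldl (fun g e =>
      match e with
      | [u, v] => stepH g u v
      | _ => g) PySem.Dict.empty := rfl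

theorem stepG_keys (g : PySem.Dict Int (List Int)) (u v : Int) :
    (stepG g u v).keys = (g.keys ++ (if g.contains u then [] else [u])) ++
      (if (v == u || g.contains v) then [] else [v]) := by
  by_cases hvu : v = u
  · subst hvu
    by_cases hcu : g.contains v
    · simp [stepG, hcu, keys_insert_ite, PySem.Dict.contains_insert]
    · have gcu : g.contains v = false := by simpa using hcu
      simp [stepG, gcu, keys_insert_ite, PySem.Dict.contains_insert]
  · by_cases hcu : g.contains u <;> by_cases hcv : g.contains v
    · simp [stepG, hcu, hcv, hvu, keys_insert_ite, PySem.Dict.contains_insert]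
    · have gcv : g.contains v = false := by simpa using hcv
      simp [stepG, hcu, gcv, hvu, keys_insert_ite, PySem.Dict.contains_insert]
    · have gcu : g.contains u = false := by simpa using hcu
      simp [stepG, gcu, hcv, hvu, keys_insert_ite, PySem.Dict.contains_insert]
    · have gcu : g.contains u = false := by simpa using hcu
      have gcv : g.contains v = false := by simpa using hcv
      simp [stepG, gcu, gcv, hvu, keys_insert_ite, PySem.Dict.contains_insert]

theorem stepG_getAdj (g : PySem.Dict Int (List Int)) (u v : Int) (hvu : v ≠ u) (k : Int) :
    getAdj (stepG g u v) k = if k = v then getAdj g v ++ [u]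
      else if k = u then getAdj g u ++ [v] else getAdj g k := by
  simp only [stepG, getAdj, PySem.Dict.getD_insert, getD_ensure]
  rw [if_neg hvu]

theorem stepG_keys_mem (g : PySem.Dict Int (List Int)) (u v k : Int) :
    k ∈ (stepG g u v).keys ↔ k ∈ g.keys ∨ k = u ∨ k = v := by
  rw [stepG_keys]
  constructor
  · intro h
    rcases List.mem_append.1 h with h | h
    · rcases List.mem_append.1 h with h | h
      · exact Or.inl h
      · right; left
        revert h; split_ifs <;> simp_all
    · right; right
      revert h; split_ifs <;> simp_all
  · intro h
    rcases h with h | rfl | rfl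
    · exact List.mem_append.2 (Or.inl (List.mem_append.2 (Or.inl h)))
    · by_cases hc : g.contains k
      · exact List.mem_append.2 (Or.inl (List.mem_append.2 (Or.inl
          ((PySem.Dict.contains_iff_mem_keys g k).1 hc))))
      · have : g.contains k = false := by simpa using hc
        simp [this]
    · by_cases hc : (k == u || g.contains k) = true
      · rcases Bool.or_eq_true_iff.1 hc with h | h
        · have : k = u := by simpa using h
          subst this
          by_cases hc2 : g.contains k
          · exact List.mem_append.2 (Or.inl (List.mem_append.2 (Or.inl
              ((PySem.Dict.contains_iff_mem_keys g k).1 hc2))))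
          · have : g.contains k = false := by simpa using hc2
            simp [this]
        · exact List.mem_append.2 (Or.inl (List.mem_append.2 (Or.inl
            ((PySem.Dict.contains_iff_mem_keys g k).1 h))))
      · have : (k == u || g.contains k) = false := by simpa using hc
        simp [this]

theorem build_loop_eq :
    ∀ (l : List (List Int)) (g h : PySem.Dict Int (List Int)),
    g.keys = h.keys → (∀ k, g.getD k [] = h.getD k []) →
    ((l.foldl (fun g e => match e with | [u, v] => stepG g u v | _ => g) g).keys =
      (l.foldl (fun h e => match e with | [u, v] => stepH h u v | _ => h) h).keys) ∧
    ∀ k, (l.foldl (fun g e => match e with | [u, v] => stepG g u v | _ => g) g).getD k [] =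
      (l.foldl (fun h e => match e with | [u, v] => stepH h u v | _ => h) h).getD k [] := by
  intro l
  induction l with
  | nil => intro g h hk hd; exact ⟨hk, hd⟩
  | cons e l ih =>
    intro g h hk hd
    simp only [List.foldl_cons]
    rcases e with _ | ⟨u, t⟩
    · exact ih g h hk hd
    · rcases t with _ | ⟨v, t2⟩
      · exact ih g h hk hd
      · rcases t2 with _ | ⟨w, t3⟩
        · exact ih (stepG g u v) (stepH h u v)
            (build_step_eq g h u v hk hd).1 (build_step_eq g h u v hk hd).2
        · exact ih g h hk hd

theorem build_eq (edges : List (List Int)) :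
    (buildGraphA edges).keys = (buildGraphB edges).keys ∧
    ∀ k, getAdj (buildGraphA edges) k = getAdj (buildGraphB edges) k := by
  rw [buildGraphA_eq_foldl, buildGraphB_eq_foldl]
  exact build_loop_eq edges PySem.Dict.empty PySem.Dict.empty rfl (fun k => rfl)

theorem minDegKey_congr (g h : PySem.Dict Int (List Int))
    (hk : g.keys = h.keys) (ha : ∀ k, getAdj g k = getAdj h k) :
    minDegKey g = minDegKey h := by
  unfold minDegKey
  rw [hk]
  have hf : (fun (best x : Int) =>
      if (getAdj g x).length < (getAdj g best).length then x else best) =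
      (fun (best x : Int) =>
      if (getAdj h x).length < (getAdj h best).length then x else best) := by
    funext best x; rw [ha, ha]
  rw [hf]

theorem minDegKey_mem (g : PySem.Dict Int (List Int)) (h : g.keys ≠ []) :
    minDegKey g ∈ g.keys := by
  unfold minDegKey
  rcases hk : g.keys with _ | ⟨k, ks⟩
  · exact absurd hk h
  · have : ∀ (l : List Int) (best : Int), best ∈ g.keys → (∀ x ∈ l, x ∈ g.keys) →
        (l.foldl (fun best x =>
          if (getAdj g x).length < (getAdj g best).length then x else best) best) ∈ g.keys := by
      intro l
      induction l with
      | nil => intro best hb _; exact hb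
      | cons x l ih =>
        intro best hb hl
        simp only [List.foldl_cons]
        split_ifs
        · exact ih x (hl x (by simp)) (fun z hz => hl z (by simp [hz]))
        · exact ih best hb (fun z hz => hl z (by simp [hz]))
    have hres := this ks k (by simp [hk]) (fun z hz => by simp [hk, hz])
    rw [hk] at hres
    exact hres

-- ---------- facts about the built graph ----------

/-- invariant maintained by A's graph building loop. -/
def GInv (n : Nat) (g : PySem.Dict Int (List Int)) : Prop :=
  (∀ k ∈ g.keys, InR' n k) ∧
  (∀ k x, x ∈ getAdj g k → x ∈ g.keys ∧ k ∈ g.keys ∧ x ≠ k) ∧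
  (∀ k ∈ g.keys, getAdj g k ≠ []) ∧
  g.keys.Nodup

theorem stepG_keys_nodup (g : PySem.Dict Int (List Int)) (u v : Int)
    (h : g.keys.Nodup) : (stepG g u v).keys.Nodup := by
  rw [stepG_keys]
  by_cases hcu : g.contains u <;> by_cases hcv : (v == u || g.contains v) = true
  · simp [hcu, hcv, h]
  · have h2 : (v == u || g.contains v) = false := by simpa using hcv
    have hvk : v ∉ g.keys := by
      intro hmem
      have := (PySem.Dict.contains_iff_mem_keys g v).2 hmem
      simp [this] at h2
    simp [hcu, h2, List.nodup_append, h, hvk]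
    exact fun a ha hav => hvk (hav ▸ ha)
  · have h1 : g.contains u = false := by simpa using hcu
    have huk : u ∉ g.keys := by
      intro hmem
      have := (PySem.Dict.contains_iff_mem_keys g u).2 hmem
      simp [this] at h1
    simp [h1, hcv, List.nodup_append, h, huk]
    exact fun a ha hau => huk (hau ▸ ha)
  · have h1 : g.contains u = false := by simpa using hcu
    have h2 : (v == u || g.contains v) = false := by simpa using hcv
    have huk : u ∉ g.keys := by
      intro hmem
      have := (PySem.Dict.contains_iff_mem_keys g u).2 hmem
      simp [this] at h1
    have hvk : v ∉ g.keys := by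
      intro hmem
      have := (PySem.Dict.contains_iff_mem_keys g v).2 hmem
      simp [this] at h2
    have hvu : ¬ v = u := by
      intro hh; simp [hh] at h2
    simp [h1, h2, h, huk, hvk, hvu, List.nodup_append]
    exact ⟨fun hh => hvu hh.symm, fun a ha => ⟨fun hh => huk (hh ▸ ha), fun hh => hvk (hh ▸ ha)⟩⟩

theorem stepG_inv (n : Nat) (g : PySem.Dict Int (List Int)) (u v : Int)
    (hu : InR' n u) (hv : InR' n v) (hvu : v ≠ u) (hI : GInv n g) :
    GInv n (stepG g u v) := by
  obtain ⟨i1, i2, i3, i4⟩ := hI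
  refine ⟨?_, ?_, ?_, stepG_keys_nodup g u v i4⟩
  · intro k hk
    rcases (stepG_keys_mem g u v k).1 hk with h | rfl | rfl
    · exact i1 k h
    · exact hu
    · exact hv
  · intro k x hx
    rw [stepG_getAdj g u v hvu] at hx
    by_cases hkv : k = v
    · rw [if_pos hkv] at hx
      rcases List.mem_append.1 hx with h | h
      · obtain ⟨ha, hb, hc⟩ := i2 v x h
        exact ⟨(stepG_keys_mem g u v x).2 (Or.inl ha),
          (stepG_keys_mem g u v k).2 (Or.inr (Or.inr hkv)), by rw [hkv]; exact hc⟩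
      · have hxu : x = u := List.mem_singleton.1 h
        exact ⟨(stepG_keys_mem g u v x).2 (Or.inr (Or.inl hxu)),
          (stepG_keys_mem g u v k).2 (Or.inr (Or.inr hkv)),
          by rw [hxu, hkv]; exact fun hh => hvu hh.symm⟩
    · rw [if_neg hkv] at hx
      by_cases hku : k = u
      · rw [if_pos hku] at hx
        rcases List.mem_append.1 hx with h | h
        · obtain ⟨ha, hb, hc⟩ := i2 u x h
          exact ⟨(stepG_keys_mem g u v x).2 (Or.inl ha),
            (stepG_keys_mem g u v k).2 (Or.inr (Or.inl hku)), by rw [hku]; exact hc⟩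
        · have hxv : x = v := List.mem_singleton.1 h
          exact ⟨(stepG_keys_mem g u v x).2 (Or.inr (Or.inr hxv)),
            (stepG_keys_mem g u v k).2 (Or.inr (Or.inl hku)),
            by rw [hxv, hku]; exact hvu⟩
      · rw [if_neg hku] at hx
        obtain ⟨ha, hb, hc⟩ := i2 k x hx
        exact ⟨(stepG_keys_mem g u v x).2 (Or.inl ha),
          (stepG_keys_mem g u v k).2 (Or.inl hb), hc⟩
  · intro k hk
    rw [stepG_getAdj g u v hvu]
    by_cases hkv : k = v
    · rw [if_pos hkv]; simp
    · rw [if_neg hkv]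
      by_cases hku : k = u
      · rw [if_pos hku]; simp
      · rw [if_neg hku]
        rcases (stepG_keys_mem g u v k).1 hk with h | h | h
        · exact i3 k h
        · exact absurd h hku
        · exact absurd h hkv

theorem edgeOK_shape (n : Int) (e : List Int) (h : edgeOK n e = true) :
    ∃ u v, e = [u, v] ∧ 0 ≤ u ∧ u < n ∧ 0 ≤ v ∧ v < n ∧ u ≠ v := by
  rcases e with _ | ⟨u, t⟩
  · simp [edgeOK] at h
  · rcases t with _ | ⟨v, t2⟩
    · simp [edgeOK] at h
    · rcases t2 with _ | ⟨w, t3⟩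
      · simp only [edgeOK, Bool.and_eq_true, decide_eq_true_iff] at h
        refine ⟨u, v, rfl, ?_, ?_, ?_, ?_, ?_⟩ <;> tauto
      · simp [edgeOK] at h

theorem build_facts (edges : List (List Int)) (n : Nat)
    (hok : ∀ e ∈ edges, edgeOK (n : Int) e = true) :
    (∀ k ∈ (buildGraphA edges).keys, InR' n k) ∧
    (∀ k x, x ∈ getAdj (buildGraphA edges) k →
        x ∈ (buildGraphA edges).keys ∧ k ∈ (buildGraphA edges).keys ∧ x ≠ k) ∧
    (∀ k ∈ (buildGraphA edges).keys, getAdj (buildGraphA edges) k ≠ []) ∧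
    (edges ≠ [] → (buildGraphA edges).keys ≠ []) ∧
    (buildGraphA edges).keys.Nodup := by
  have main : ∀ (l : List (List Int)) (g : PySem.Dict Int (List Int)),
      (∀ e ∈ l, edgeOK (n : Int) e = true) → GInv n g →
      GInv n (l.foldl (fun g e => match e with | [u, v] => stepG g u v | _ => g) g) ∧
      ((g.keys ≠ [] ∨ l ≠ []) →
        (l.foldl (fun g e => match e with | [u, v] => stepG g u v | _ => g) g).keys ≠ []) := by
    intro l
    induction l with
    | nil =>
      intro g _ hI
      exact ⟨hI, fun h => by
        rcases h with h | h
        · exact h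
        · exact absurd rfl h⟩
    | cons e l ih =>
      intro g hl hI
      obtain ⟨u, v, rfl, h0u, hun, h0v, hvn, huv⟩ := edgeOK_shape _ e (hl e (by simp))
      simp only [List.foldl_cons]
      have hstep := stepG_inv n g u v ⟨h0u, hun⟩ ⟨h0v, hvn⟩ (Ne.symm huv) hI
      have hne : (stepG g u v).keys ≠ [] := by
        intro hnil
        have := (stepG_keys_mem g u v u).2 (Or.inr (Or.inl rfl))
        rw [hnil] at this
        exact absurd this (List.not_mem_nil)
      obtain ⟨hA, hB⟩ := ih (stepG g u v) (fun e he => hl e (by simp [he])) hstep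
      exact ⟨hA, fun _ => hB (Or.inl hne)⟩
  have hInvEmpty : GInv n PySem.Dict.empty := by
    refine ⟨?_, ?_, ?_, ?_⟩ <;> simp [GInv, getAdj, PySem.Dict.keys_empty]
  obtain ⟨⟨i1, i2, i3, i4⟩, hne⟩ :=
    main edges PySem.Dict.empty hok hInvEmpty
  rw [buildGraphA_eq_foldl]
  refine ⟨i1, i2, i3, fun h => hne (Or.inr h), i4⟩

-- ---------- BFS: invariant and A/B bisimulation ----------

/-- the properties of the discovery-pair log both BFS loops maintain and output. -/
structure BfsOut (root : Int) (keys : List Int) (P : List (Int × Int)) : Prop where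
  nodupSnd : (P.map Prod.snd).Nodup
  nroot : ∀ pr ∈ P, pr.2 ≠ root
  anch : ∀ i (hi : i < P.length),
    P[i].1 = root ∨ ∃ j, ∃ hj : j < P.length, j < i ∧ P[j].2 = P[i].1
  distinct : ∀ pr ∈ P, pr.1 ≠ pr.2
  keysMem : ∀ pr ∈ P, pr.1 ∈ keys ∧ pr.2 ∈ keys

theorem bfsOut_append (root : Int) (keys : List Int) (L new : List (Int × Int)) (b : Int)
    (h : BfsOut root keys L) (hb : b ∈ L.map Prod.snd)
    (hfst : ∀ pr ∈ new, pr.1 = b) (hnd : (new.map Prod.snd).Nodup)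
    (hsnd : ∀ pr ∈ new, pr.2 ∈ keys ∧ pr.2 ≠ b ∧ pr.2 ≠ root ∧ pr.2 ∉ L.map Prod.snd) :
    BfsOut root keys (L ++ new) := by
  obtain ⟨pb, hpb, hpb2⟩ := List.mem_map.1 hb
  obtain ⟨jb, hjb, hjbe⟩ := List.getElem_of_mem hpb
  constructor
  · rw [List.map_append]
    exact List.nodup_append.2 ⟨h.nodupSnd, hnd, by
      intro a ha b' hb' hab
      obtain ⟨pr, hpr, rfl⟩ := List.mem_map.1 hb'
      exact (hsnd pr hpr).2.2.2 (hab ▸ ha)⟩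
  · intro pr hpr
    rcases List.mem_append.1 hpr with hh | hh
    · exact h.nroot pr hh
    · exact (hsnd pr hh).2.2.1
  · intro i hi
    by_cases hiL : i < L.length
    · have hgl : (L ++ new)[i] = L[i]'hiL := List.getElem_append_left hiL
      rcases h.anch i hiL with hh | ⟨j, hj, hji, hje⟩
      · left; rw [hgl]; exact hh
      · right
        refine ⟨j, by simp; omega, hji, ?_⟩
        rw [hgl, List.getElem_append_left hj]
        exact hje
    · have hmem : (L ++ new)[i] ∈ new := by
        rw [List.getElem_append_right (le_of_not_gt hiL)]
        exact List.getElem_mem _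
      right
      refine ⟨jb, by simp; omega, by omega, ?_⟩
      rw [List.getElem_append_left hjb, hjbe, hpb2, hfst _ hmem]
  · intro pr hpr
    rcases List.mem_append.1 hpr with hh | hh
    · exact h.distinct pr hh
    · rw [hfst pr hh]
      exact fun heq => (hsnd pr hh).2.1 heq.symm
  · intro pr hpr
    rcases List.mem_append.1 hpr with hh | hh
    · exact h.keysMem pr hh
    · refine ⟨?_, (hsnd pr hh).1⟩
      rw [hfst pr hh, ← hpb2, ← hjbe]
      exact (h.keysMem _ (List.getElem_mem hjb)).2

theorem bfsOut_prefix (root : Int) (keys : List Int) (L1 L2 : List (Int × Int))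
    (h : BfsOut root keys (L1 ++ L2)) : BfsOut root keys L1 := by
  constructor
  · have := h.nodupSnd
    rw [List.map_append] at this
    exact (List.nodup_append.1 this).1
  · exact fun pr hpr => h.nroot pr (List.mem_append.2 (Or.inl hpr))
  · intro i hi
    have hi' : i < (L1 ++ L2).length := by simp; omega
    rcases h.anch i hi' with hh | ⟨j, hj, hji, hje⟩
    · left; rw [← List.getElem_append_left (bs := L2) hi]; exact hh
    · right
      have hjL : j < L1.length := by omega
      refine ⟨j, hjL, hji, ?_⟩
      rw [← List.getElem_append_left (bs := L2) hjL,
          ← List.getElem_append_left (bs := L2) hi]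
      exact hje
  · exact fun pr hpr => h.distinct pr (List.mem_append.2 (Or.inl hpr))
  · exact fun pr hpr => h.keysMem pr (List.mem_append.2 (Or.inl hpr))

theorem inner_bisim (G : PySem.Dict Int (List Int)) (n : Nat)
    (hkr : ∀ k ∈ G.keys, InR' n k) (b : Int) :
    ∀ (nbrs : List Int) (hn : ∀ x ∈ nbrs, x ∈ G.keys ∧ x ≠ b)
      (visited : List Bool) (seen : PySem.Set Int) (q : List (Int × Int)),
    visited.length = n →
    (∀ x ∈ G.keys, seen.contains x = visited.getD x.toNat false) →
    ∃ new : List (Int × Int),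
      (nbrs.foldl (fun (s : List Bool × List (Int × Int)) i =>
          if !(s.1.getD i.toNat false) then (s.1.set i.toNat true, s.2 ++ [(b, i)])
          else s) (visited, q)).2 = q ++ new ∧
      (nbrs.foldl (fun (s : PySem.Set Int × List (Int × Int)) nb =>
          if s.1.contains nb then s else (s.1.add nb, s.2 ++ [(b, nb)])) (seen, q)).2
        = q ++ new ∧
      (let v' := (nbrs.foldl (fun (s : List Bool × List (Int × Int)) i =>
          if !(s.1.getD i.toNat false) then (s.1.set i.toNat true, s.2 ++ [(b, i)])
          else s) (visited, q)).1
       let s' := (nbrs.foldl (fun (s : PySem.Set Int × List (Int × Int)) nb =>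
          if s.1.contains nb then s else (s.1.add nb, s.2 ++ [(b, nb)])) (seen, q)).1
       v'.length = n ∧ (∀ x ∈ G.keys, s'.contains x = v'.getD x.toNat false) ∧
       (∀ x, x ∈ s' ↔ x ∈ seen ∨ x ∈ new.map Prod.snd)) ∧
      (new.map Prod.snd).Nodup ∧
      (∀ pr ∈ new, pr.1 = b ∧ pr.2 ∈ G.keys ∧ pr.2 ≠ b ∧ pr.2 ∉ seen) := by
  intro nbrs
  induction nbrs with
  | nil =>
    intro hn visited seen q hlen hrel
    exact ⟨[], by simp, by simp, ⟨hlen, hrel, fun x => by simp⟩, by simp, by simp⟩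
  | cons nb nbrs ih =>
    intro hn visited seen q hlen hrel
    obtain ⟨hnbk, hnbb⟩ := hn nb (by simp)
    have hnbr : InR' n nb := hkr nb hnbk
    have hnblen : nb.toNat < visited.length := by
      obtain ⟨h1, h2⟩ := hnbr; omega
    simp only [List.foldl_cons]
    by_cases hcase : seen.contains nb
    · -- already seen: both sides skip
      have hvis : visited.getD nb.toNat false = true := by rw [← hrel nb hnbk]; exact hcase
      rw [if_pos hcase]
      have hvis' : (!visited.getD nb.toNat false) = false := by rw [hvis]; rfl
      rw [hvis']
      simp only [Bool.false_eq_true, if_false]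
      obtain ⟨new, ha, hb', hc, hd, he⟩ :=
        ih (fun x hx => hn x (by simp [hx])) visited seen q hlen hrel
      exact ⟨new, ha, hb', hc, hd, he⟩
    · -- fresh: both sides mark nb and enqueue (b, nb)
      have hseenF : seen.contains nb = false := by simpa using hcase
      have hvisF : visited.getD nb.toNat false = false := by rw [← hrel nb hnbk]; exact hseenF
      rw [if_neg hcase]
      have hvis' : (!visited.getD nb.toNat false) = true := by rw [hvisF]; rfl
      rw [hvis']
      simp only [if_true]
      have hnbmem : nb ∉ seen := fun hmem => by
        rw [(PySem.Set.contains_iff seen nb).2 hmem] at hseenF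
        cases hseenF
      have hlen2 : (visited.set nb.toNat true).length = n := by simp [hlen]
      have hrel2 : ∀ x ∈ G.keys, (seen.add nb).contains x =
          (visited.set nb.toNat true).getD x.toNat false := by
        intro x hx
        have hxr : InR' n x := hkr x hx
        rw [getD_set_poly _ nb x _ _ hnbr.1 hnblen hxr.1
          (by obtain ⟨h1, h2⟩ := hxr; rw [hlen]; omega)]
        by_cases hxnb : x = nb
        · rw [if_pos hxnb]
          subst hxnb
          exact (PySem.Set.contains_iff _ x).2 ((PySem.Set.mem_add seen x x).2 (Or.inr rfl))
        · rw [if_neg hxnb, ← hrel x hx]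
          by_cases hxs : x ∈ seen
          · rw [(PySem.Set.contains_iff _ x).2 ((PySem.Set.mem_add seen nb x).2 (Or.inl hxs)),
              (PySem.Set.contains_iff _ x).2 hxs]
          · have h1 : (seen.add nb).contains x = false := by
              rcases hcc : (seen.add nb).contains x with _ | _
              · rfl
              · exact absurd ((PySem.Set.mem_add seen nb x).1
                  ((PySem.Set.contains_iff _ x).1 hcc)) (by
                    rintro (h | h)
                    · exact hxs h
                    · exact hxnb h)
            have h2 : seen.contains x = false := by
              rcases hcc : seen.contains x with _ | _
              · rfl
              · exact absurd ((PySem.Set.contains_iff _ x).1 hcc) hxs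
            rw [h1, h2]
      obtain ⟨new, ha, hb', ⟨hc1, hc2, hc3⟩, hd, he⟩ :=
        ih (fun x hx => hn x (by simp [hx])) (visited.set nb.toNat true) (seen.add nb)
          (q ++ [(b, nb)]) hlen2 hrel2
      refine ⟨(b, nb) :: new, ?_, ?_, ⟨hc1, hc2, ?_⟩, ?_, ?_⟩
      · rw [ha, List.append_assoc]; rfl
      · rw [hb', List.append_assoc]; rfl
      · intro x
        rw [hc3 x]
        simp only [PySem.Set.mem_add, List.map_cons, List.mem_cons]
        constructor
        · rintro ((h | h) | h)
          · exact Or.inl h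
          · exact Or.inr (Or.inl h)
          · exact Or.inr (Or.inr h)
        · rintro (h | h | h)
          · exact Or.inl (Or.inl h)
          · exact Or.inl (Or.inr h)
          · exact Or.inr h
      · simp only [List.map_cons, List.nodup_cons]
        refine ⟨?_, hd⟩
        intro hmem
        obtain ⟨pr, hpr, hpr2⟩ := List.mem_map.1 hmem
        have := (he pr hpr).2.2.2
        exact this ((PySem.Set.mem_add seen nb nb).2 (Or.inr rfl) |> fun hh => hpr2 ▸ hh)
      · intro pr hpr
        rcases List.mem_cons.1 hpr with rfl | hpr'
        · exact ⟨rfl, hnbk, hnbb, hnbmem⟩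
        · obtain ⟨e1, e2, e3, e4⟩ := he pr hpr'
          refine ⟨e1, e2, e3, fun hmem => e4 ((PySem.Set.mem_add seen nb pr.2).2 (Or.inl hmem))⟩


theorem bfs_main (G G' : PySem.Dict Int (List Int)) (root : Int) (n : Nat)
    (hkr : ∀ k ∈ G.keys, InR' n k)
    (hadj : ∀ k x, x ∈ getAdj G k → x ∈ G.keys ∧ k ∈ G.keys ∧ x ≠ k)
    (hG' : ∀ k, k ≠ root → getAdj G' k = getAdj G k) :
    ∀ (fuel : Nat) (visited : List Bool) (seen : PySem.Set Int)
      (queue path : List (Int × Int)),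
    visited.length = n →
    (∀ x ∈ G.keys, seen.contains x = visited.getD x.toNat false) →
    (∀ x, x ∈ seen ↔ (x = root ∨ x ∈ (path ++ queue).map Prod.snd)) →
    BfsOut root G.keys (path ++ queue) →
    bfsLoopA G' fuel visited queue path = bfsLoopB G fuel seen queue path ∧
    BfsOut root G.keys (bfsLoopA G' fuel visited queue path) := by
  intro fuel
  induction fuel with
  | zero =>
    intro visited seen queue path _ _ _ hout
    exact ⟨rfl, bfsOut_prefix root G.keys path queue hout⟩
  | succ fuel ih =>
    intro visited seen queue path hlen hrel hseen hout
    rcases queue with _ | ⟨⟨t, b⟩, rest⟩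
    · refine ⟨rfl, ?_⟩
      simpa using bfsOut_prefix root G.keys path [] (by simpa using hout)
    · have hbmem : (t, b) ∈ path ++ (t, b) :: rest := by simp
      have hbroot : b ≠ root := hout.nroot (t, b) hbmem
      have hGb : getAdj G' b = getAdj G b := hG' b hbroot
      have hn : ∀ x ∈ getAdj G b, x ∈ G.keys ∧ x ≠ b := by
        intro x hx
        obtain ⟨h1, h2, h3⟩ := hadj b x hx
        exact ⟨h1, h3⟩
      obtain ⟨new, ha, hb', ⟨hc1, hc2, hc3⟩, hd, he⟩ :=
        inner_bisim G n hkr b (getAdj G b) hn visited seen rest hlen hrel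
      simp only [bfsLoopA, bfsLoopB, hGb]
      rw [ha, hb']
      -- the new log
      have hlog : (path ++ [(t, b)]) ++ (rest ++ new) =
          ((path ++ (t, b) :: rest) ++ new) := by simp
      have houtL : BfsOut root G.keys ((path ++ (t, b) :: rest) ++ new) := by
        refine bfsOut_append root G.keys _ new b hout (by
            refine List.mem_map.2 ⟨(t, b), hbmem, rfl⟩) (fun pr hpr => (he pr hpr).1) hd ?_
        intro pr hpr
        obtain ⟨e1, e2, e3, e4⟩ := he pr hpr
        have hnot : ¬ (pr.2 = root ∨ pr.2 ∈ (path ++ (t, b) :: rest).map Prod.snd) := by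
          intro hcon
          exact e4 ((hseen pr.2).2 hcon)
        push_neg at hnot
        exact ⟨e2, e3, hnot.1, hnot.2⟩
      have hout' : BfsOut root G.keys ((path ++ [(t, b)]) ++ (rest ++ new)) := by
        rw [hlog]; exact houtL
      have hseen' : ∀ x, x ∈ ((getAdj G b).foldl
          (fun (s : PySem.Set Int × List (Int × Int)) nb =>
            if s.1.contains nb then s else (s.1.add nb, s.2 ++ [(b, nb)])) (seen, rest)).1 ↔
          (x = root ∨ x ∈ ((path ++ [(t, b)]) ++ (rest ++ new)).map Prod.snd) := by
        intro x
        rw [hc3 x, hseen x, hlog]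
        simp only [List.map_append, List.mem_append]
        constructor
        · rintro ((h | h) | h)
          · exact Or.inl h
          · exact Or.inr (Or.inl h)
          · exact Or.inr (Or.inr h)
        · rintro (h | h | h)
          · exact Or.inl (Or.inl h)
          · exact Or.inl (Or.inr h)
          · exact Or.inr h
      exact ih _ _ (rest ++ new) (path ++ [(t, b)]) hc1 hc2 hseen' hout' 

-- ---------- the children dict is grouping by parent ----------

def chOf (P : List (Int × Int)) (x : Int) : List Int :=
  (P.filter (fun pr => pr.1 == x)).map Prod.snd

theorem buildChildren_getD (pairs : List (Int × Int)) (c : Int) :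
    (buildChildren pairs).getD c [] = chOf pairs c := by
  suffices haux : ∀ (l : List (Int × Int)) (d : PySem.Dict Int (List Int)),
      (l.foldl (fun d pr => d.insert pr.1 (d.getD pr.1 [] ++ [pr.2])) d).getD c [] =
        d.getD c [] ++ (l.filter (fun pr => pr.1 == c)).map Prod.snd by
    have := haux pairs PySem.Dict.empty
    simpa [buildChildren, chOf, PySem.Dict.getD_empty] using this
  intro l
  induction l with
  | nil => intro d; simp
  | cons pr l ih =>
    intro d
    simp only [List.foldl_cons, List.filter_cons]
    by_cases hc : pr.1 = c
    · rw [ih]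
      simp [PySem.Dict.getD_insert, hc]
    · rw [ih]
      have hb : (pr.1 == c) = false := by simpa using hc
      have hcc : ¬ c = pr.1 := fun h => hc h.symm
      simp [PySem.Dict.getD_insert, hb, hcc]

-- ---------- positions, parents, ancestor chains in the discovery forest ----------

def posOf (P : List (Int × Int)) (x : Int) : Nat := P.findIdx (fun pr => pr.2 == x)

def rposOf (P : List (Int × Int)) (root x : Int) : Nat :=
  if x = root then 0 else posOf P x + 1

def parOf (P : List (Int × Int)) (root x : Int) : Int := (P.getD (posOf P x) (root, x)).1

def IsNode (P : List (Int × Int)) (root x : Int) : Prop :=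
  x = root ∨ x ∈ P.map Prod.snd

def chainF (P : List (Int × Int)) (root : Int) : Nat → Int → List Int
  | 0, _ => []
  | f+1, d => d :: (if d = root then [] else chainF P root f (parOf P root d))

/-- the ancestor chain of `d` (from `d` up to `root`), with enough fuel. -/
def chainC (P : List (Int × Int)) (root : Int) (d : Int) : List Int :=
  chainF P root (P.length + 1) d

/-- emission list of B's DFS stack machine from one `enter` entry, with fuel. -/
def expF (P : List (Int × Int)) (root : Int) : Nat → Int × Int → List (Int × Int)
  | 0, _ => []
  | f+1, pr => ((chOf P pr.2).reverse.flatMap (fun c => expF P root f (pr.2, c))) ++ [pr]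

def expC (P : List (Int × Int)) (root : Int) (pr : Int × Int) : List (Int × Int) :=
  expF P root (P.length + 1) pr

/-- emissions of the subtree below `x` (without `x`'s own exit). -/
def coreE (P : List (Int × Int)) (root : Int) (x : Int) : List (Int × Int) :=
  (chOf P x).reverse.flatMap (fun c => expC P root (x, c))

-- ---------- basic facts about positions, parents, chains ----------

theorem mem_chOf (P : List (Int × Int)) (x c : Int) :
    c ∈ chOf P x ↔ (x, c) ∈ P := by
  constructor
  · intro h
    obtain ⟨pr, hpr, rfl⟩ := List.mem_map.1 h
    have := List.of_mem_filter hpr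
    have h1 : pr.1 = x := by simpa using this
    have h2 : pr ∈ P := List.mem_of_mem_filter hpr
    rwa [← h1]
  · intro h
    exact List.mem_map.2 ⟨(x, c), List.mem_filter.2 ⟨h, by simp⟩, rfl⟩

theorem posOf_spec (P : List (Int × Int)) (x : Int) (hx : x ∈ P.map Prod.snd) :
    ∃ h : posOf P x < P.length, (P[posOf P x]).2 = x := by
  obtain ⟨pr, hpr, rfl⟩ := List.mem_map.1 hx
  have hlt : posOf P pr.2 < P.length :=
    List.findIdx_lt_length.2 ⟨pr, hpr, by simp⟩
  refine ⟨hlt, ?_⟩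
  have := List.findIdx_getElem (p := fun q : Int × Int => q.2 == pr.2) (xs := P) (w := hlt)
  simpa using this

theorem posOf_eq (P : List (Int × Int)) (hnd : (P.map Prod.snd).Nodup)
    (i : Nat) (hi : i < P.length) : posOf P (P[i].2) = i := by
  have hx : P[i].2 ∈ P.map Prod.snd := List.mem_map.2 ⟨P[i], List.getElem_mem hi, rfl⟩
  obtain ⟨hlt, heq⟩ := posOf_spec P (P[i].2) hx
  by_contra hne
  have h1 : (P.map Prod.snd)[posOf P (P[i].2)]'(by simpa using hlt) =
      (P.map Prod.snd)[i]'(by simpa using hi) := by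
    simp only [List.getElem_map]
    rw [heq]
  exact hne (List.Nodup.getElem_inj_iff hnd |>.1 h1)

theorem parOf_pair (P : List (Int × Int)) (root x : Int) (hx : x ∈ P.map Prod.snd) :
    (parOf P root x, x) ∈ P := by
  obtain ⟨hlt, heq⟩ := posOf_spec P x hx
  have hgd : P.getD (posOf P x) (root, x) = P[posOf P x] := List.getD_eq_getElem P _ hlt
  have hpair : (parOf P root x, x) = P[posOf P x] := by
    rw [parOf, hgd]
    exact Prod.ext rfl heq.symm
  rw [hpair]
  exact List.getElem_mem hlt

theorem parOf_eq (P : List (Int × Int)) (root : Int) (hnd : (P.map Prod.snd).Nodup)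
    {q x : Int} (h : (q, x) ∈ P) : parOf P root x = q := by
  obtain ⟨i, hi, hie⟩ := List.getElem_of_mem h
  have hpos : posOf P x = i := by
    have := posOf_eq P hnd i hi
    rwa [hie] at this
  rw [parOf, hpos, List.getD_eq_getElem P _ hi, hie]

theorem rposOf_lt (P : List (Int × Int)) (root : Int) (keys : List Int)
    (H : BfsOut root keys P) {q d : Int} (h : (q, d) ∈ P) :
    rposOf P root q < rposOf P root d := by
  have hdroot : d ≠ root := H.nroot (q, d) h
  obtain ⟨i, hi, hie⟩ := List.getElem_of_mem h
  have hposd : posOf P d = i := by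
    have := posOf_eq P H.nodupSnd i hi
    rwa [hie] at this
  have hrd : rposOf P root d = i + 1 := by
    rw [rposOf, if_neg hdroot, hposd]
  by_cases hq : q = root
  · rw [rposOf, if_pos hq, hrd]; omega
  · rcases H.anch i hi with hh | ⟨j, hj, hji, hje⟩
    · rw [hie] at hh; exact absurd hh hq
    · rw [hie] at hje
      have hposq : posOf P q = j := by
        have := posOf_eq P H.nodupSnd j hj
        rwa [hje] at this
      rw [rposOf, if_neg hq, hposq, hrd]
      omega

theorem fst_isNode (P : List (Int × Int)) (root : Int) (keys : List Int)
    (H : BfsOut root keys P) {q d : Int} (h : (q, d) ∈ P) : IsNode P root q := by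
  by_cases hq : q = root
  · exact Or.inl hq
  · obtain ⟨i, hi, hie⟩ := List.getElem_of_mem h
    rcases H.anch i hi with hh | ⟨j, hj, hji, hje⟩
    · rw [hie] at hh; exact absurd hh hq
    · rw [hie] at hje
      right
      have hq : q = P[j].2 := by rw [hje]
      rw [hq]
      exact List.mem_map.2 ⟨P[j], List.getElem_mem hj, rfl⟩

theorem snd_isNode (P : List (Int × Int)) (root : Int) {q d : Int} (h : (q, d) ∈ P) :
    IsNode P root d :=
  Or.inr (List.mem_map.2 ⟨(q, d), h, rfl⟩)

theorem rposOf_le (P : List (Int × Int)) (root x : Int) (hx : IsNode P root x) :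
    rposOf P root x ≤ P.length := by
  rcases hx with rfl | hx
  · rw [rposOf, if_pos rfl]; omega
  · obtain ⟨hlt, _⟩ := posOf_spec P x hx
    rw [rposOf]
    split_ifs <;> omega

theorem rposOf_pos (P : List (Int × Int)) (root x : Int) (hxr : x ≠ root) :
    0 < rposOf P root x := by
  rw [rposOf, if_neg hxr]; omega

theorem chainF_stable (P : List (Int × Int)) (root : Int) (keys : List Int)
    (H : BfsOut root keys P) :
    ∀ (r : Nat) (x : Int) (f1 f2 : Nat), IsNode P root x → rposOf P root x ≤ r →
    rposOf P root x < f1 → rposOf P root x < f2 →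
    chainF P root f1 x = chainF P root f2 x := by
  intro r
  induction r with
  | zero =>
    intro x f1 f2 hx hr h1 h2
    have hxr : x = root := by
      by_contra hne
      have := rposOf_pos P root x hne
      omega
    obtain ⟨g1, rfl⟩ : ∃ g1, f1 = g1 + 1 := ⟨f1 - 1, by omega⟩
    obtain ⟨g2, rfl⟩ : ∃ g2, f2 = g2 + 1 := ⟨f2 - 1, by omega⟩
    simp [chainF, hxr]
  | succ r ih =>
    intro x f1 f2 hx hr h1 h2
    obtain ⟨g1, rfl⟩ : ∃ g1, f1 = g1 + 1 := ⟨f1 - 1, by omega⟩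
    obtain ⟨g2, rfl⟩ : ∃ g2, f2 = g2 + 1 := ⟨f2 - 1, by omega⟩
    by_cases hxr : x = root
    · simp [chainF, hxr]
    · have hxs : x ∈ P.map Prod.snd := hx.resolve_left hxr
      have hpp := parOf_pair P root x hxs
      have hplt := rposOf_lt P root keys H hpp
      have hpn := fst_isNode P root keys H hpp
      simp only [chainF, if_neg hxr]
      rw [ih (parOf P root x) g1 g2 hpn (by omega) (by omega) (by omega)]

theorem chain_unfold (P : List (Int × Int)) (root : Int) (keys : List Int)
    (H : BfsOut root keys P) (x : Int) (hx : IsNode P root x) :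
    chainC P root x = x :: (if x = root then [] else chainC P root (parOf P root x)) := by
  by_cases hxr : x = root
  · simp [chainC, chainF, hxr]
  · have hxs : x ∈ P.map Prod.snd := hx.resolve_left hxr
    have hpp := parOf_pair P root x hxs
    have hplt := rposOf_lt P root keys H hpp
    have hpn := fst_isNode P root keys H hpp
    have hxle := rposOf_le P root x hx
    simp only [chainC, chainF, if_neg hxr]
    rw [chainF_stable P root keys H (rposOf P root (parOf P root x)) (parOf P root x)
      P.length (P.length + 1) hpn le_rfl (by omega) (by omega)]
    rfl

theorem chain_self (P : List (Int × Int)) (root x : Int) :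
    x ∈ chainC P root x := by
  simp [chainC, chainF]

theorem chain_facts (P : List (Int × Int)) (root : Int) (keys : List Int)
    (H : BfsOut root keys P) :
    ∀ (r : Nat) (x : Int), IsNode P root x → rposOf P root x ≤ r →
    (∀ y ∈ chainC P root x, IsNode P root y ∧ rposOf P root y ≤ rposOf P root x) ∧
    (∀ c ∈ chainC P root x, chainC P root c <:+ chainC P root x) ∧
    root ∈ chainC P root x := by
  intro r
  induction r with
  | zero =>
    intro x hx hr
    have hxr : x = root := by
      by_contra hne
      have := rposOf_pos P root x hne
      omega
    have hch : chainC P root x = [x] := by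
      rw [chain_unfold P root keys H x hx, if_pos hxr]
    rw [hch]
    refine ⟨?_, ?_, by simp [hxr.symm]⟩
    · intro y hy
      have : y = x := by simpa using hy
      rw [this]; exact ⟨hx, le_rfl⟩
    · intro c hc
      have : c = x := by simpa using hc
      rw [this, hch]
  | succ r ih =>
    intro x hx hr
    by_cases hxr : x = root
    · have hch : chainC P root x = [x] := by
        rw [chain_unfold P root keys H x hx, if_pos hxr]
      rw [hch]
      refine ⟨?_, ?_, by simp [hxr.symm]⟩
      · intro y hy
        have : y = x := by simpa using hy
        rw [this]; exact ⟨hx, le_rfl⟩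
      · intro c hc
        have : c = x := by simpa using hc
        rw [this, hch]
    · have hxs : x ∈ P.map Prod.snd := hx.resolve_left hxr
      have hpp := parOf_pair P root x hxs
      have hplt := rposOf_lt P root keys H hpp
      have hpn := fst_isNode P root keys H hpp
      obtain ⟨ihA, ihB, ihC⟩ := ih (parOf P root x) hpn (by omega)
      rw [chain_unfold P root keys H x hx, if_neg hxr]
      refine ⟨?_, ?_, ?_⟩
      · intro y hy
        rcases List.mem_cons.1 hy with rfl | hy'
        · exact ⟨hx, le_rfl⟩
        · obtain ⟨h1, h2⟩ := ihA y hy'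
          exact ⟨h1, by omega⟩
      · intro c hc
        rcases List.mem_cons.1 hc with rfl | hc'
        · rw [chain_unfold P root keys H c hx, if_neg hxr]
        · exact (ihB c hc').trans (List.suffix_cons _ _)
      · exact List.mem_cons.2 (Or.inr ihC)

theorem chain_isNode (P : List (Int × Int)) (root : Int) (keys : List Int)
    (H : BfsOut root keys P) {x y : Int} (hx : IsNode P root x)
    (hy : y ∈ chainC P root x) :
    IsNode P root y ∧ rposOf P root y ≤ rposOf P root x :=
  (chain_facts P root keys H (rposOf P root x) x hx le_rfl).1 y hy

theorem chain_suffix (P : List (Int × Int)) (root : Int) (keys : List Int)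
    (H : BfsOut root keys P) {x c : Int} (hx : IsNode P root x)
    (hc : c ∈ chainC P root x) :
    chainC P root c <:+ chainC P root x :=
  (chain_facts P root keys H (rposOf P root x) x hx le_rfl).2.1 c hc

theorem chain_root (P : List (Int × Int)) (root : Int) (keys : List Int)
    (H : BfsOut root keys P) {x : Int} (hx : IsNode P root x) :
    root ∈ chainC P root x :=
  (chain_facts P root keys H (rposOf P root x) x hx le_rfl).2.2

theorem chain_trans (P : List (Int × Int)) (root : Int) (keys : List Int)
    (H : BfsOut root keys P) {x c d : Int} (hd : IsNode P root d)
    (hc : c ∈ chainC P root d) (hx : x ∈ chainC P root c) :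
    x ∈ chainC P root d :=
  (chain_suffix P root keys H hd hc).subset hx

theorem sibling_not_chain (P : List (Int × Int)) (root : Int) (keys : List Int)
    (H : BfsOut root keys P) {x c c' : Int} (hc : c ∈ chOf P x) (hc' : c' ∈ chOf P x)
    (hne : c ≠ c') : c' ∉ chainC P root c := by
  have hcp : (x, c) ∈ P := (mem_chOf P x c).1 hc
  have hcp' : (x, c') ∈ P := (mem_chOf P x c').1 hc'
  have hcs : IsNode P root c := snd_isNode P root hcp
  have hxn : IsNode P root x := fst_isNode P root keys H hcp
  have hpar : parOf P root c = x := parOf_eq P root H.nodupSnd hcp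
  have hcroot : c ≠ root := H.nroot (x, c) hcp
  intro hmem
  rw [chain_unfold P root keys H c hcs, if_neg hcroot, hpar] at hmem
  rcases List.mem_cons.1 hmem with h | h
  · exact hne h.symm
  · have := (chain_isNode P root keys H hxn h).2
    have := rposOf_lt P root keys H hcp'
    omega

theorem chain_linear (P : List (Int × Int)) (root : Int) (keys : List Int)
    (H : BfsOut root keys P) {d c c' : Int} (hd : IsNode P root d)
    (hc : c ∈ chainC P root d) (hc' : c' ∈ chainC P root d) :
    c' ∈ chainC P root c ∨ c ∈ chainC P root c' := by
  have h1 := chain_suffix P root keys H hd hc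
  have h2 := chain_suffix P root keys H hd hc'
  rcases List.suffix_or_suffix_of_suffix h1 h2 with h | h
  · exact Or.inr (h.subset (chain_self P root c))
  · exact Or.inl (h.subset (chain_self P root c'))

-- ---------- the emission list of the DFS ----------

theorem flatMap_congr' {α β : Type} (l : List α) (f g : α → List β)
    (h : ∀ a ∈ l, f a = g a) : l.flatMap f = l.flatMap g := by
  induction l with
  | nil => rfl
  | cons a l ih =>
    simp only [List.flatMap_cons]
    rw [h a (by simp), ih (fun a ha => h a (by simp [ha]))]

/-- remaining-fuel measure for the DFS emission of the subtree below `x`. -/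
def mE (P : List (Int × Int)) (root x : Int) : Nat :=
  P.length + 1 - rposOf P root x

theorem mE_child (P : List (Int × Int)) (root : Int) (keys : List Int)
    (H : BfsOut root keys P) {x c : Int} (hc : c ∈ chOf P x) (hx : IsNode P root x) :
    mE P root c < mE P root x := by
  have hcp : (x, c) ∈ P := (mem_chOf P x c).1 hc
  have h1 := rposOf_lt P root keys H hcp
  have h2 := rposOf_le P root x hx
  have h3 := rposOf_le P root c (snd_isNode P root hcp)
  unfold mE
  omega

theorem mE_pos (P : List (Int × Int)) (root x : Int) (hx : IsNode P root x) :
    1 ≤ mE P root x := by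
  have := rposOf_le P root x hx
  unfold mE
  omega

theorem exp_stable (P : List (Int × Int)) (root : Int) (keys : List Int)
    (H : BfsOut root keys P) :
    ∀ (r : Nat) (x : Int) (p : Int) (f1 f2 : Nat), IsNode P root x → mE P root x ≤ r →
    mE P root x ≤ f1 → mE P root x ≤ f2 →
    expF P root f1 (p, x) = expF P root f2 (p, x) := by
  intro r
  induction r with
  | zero =>
    intro x p f1 f2 hx hr _ _
    have := mE_pos P root x hx
    omega
  | succ r ih =>
    intro x p f1 f2 hx hr h1 h2
    have hm := mE_pos P root x hx
    obtain ⟨g1, rfl⟩ : ∃ g1, f1 = g1 + 1 := ⟨f1 - 1, by omega⟩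
    obtain ⟨g2, rfl⟩ : ∃ g2, f2 = g2 + 1 := ⟨f2 - 1, by omega⟩
    simp only [expF]
    congr 1
    refine flatMap_congr' _ _ _ ?_
    intro c hcrev
    have hc : c ∈ chOf P x := List.mem_reverse.1 hcrev
    have hcn : IsNode P root c := snd_isNode P root ((mem_chOf P x c).1 hc)
    have hlt := mE_child P root keys H hc hx
    exact ih c x g1 g2 hcn (by omega) (by omega) (by omega)

theorem exp_unfold (P : List (Int × Int)) (root : Int) (keys : List Int)
    (H : BfsOut root keys P) (p x : Int) (hx : IsNode P root x) :
    expC P root (p, x) = coreE P root x ++ [(p, x)] := by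
  show expF P root (P.length + 1) (p, x) = _
  have hlen1 : ∃ g, P.length + 1 = g + 1 := ⟨P.length, rfl⟩
  simp only [expF, coreE]
  congr 1
  refine flatMap_congr' _ _ _ ?_
  intro c hcrev
  have hc : c ∈ chOf P x := List.mem_reverse.1 hcrev
  have hcn : IsNode P root c := snd_isNode P root ((mem_chOf P x c).1 hc)
  have hm := mE_pos P root c hcn
  have hle : mE P root c ≤ P.length := by
    have := rposOf_pos P root c (H.nroot _ ((mem_chOf P x c).1 hc))
    unfold mE
    omega
  exact exp_stable P root keys H (mE P root c) c x P.length (P.length + 1) hcn le_rfl hle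
    (by omega)

theorem chOf_nodup (P : List (Int × Int)) (root : Int) (keys : List Int)
    (H : BfsOut root keys P) (x : Int) : (chOf P x).Nodup := by
  have hsub : List.Sublist ((P.filter (fun pr => pr.1 == x)).map Prod.snd)
      (P.map Prod.snd) := List.Sublist.map Prod.snd List.filter_sublist
  exact H.nodupSnd.sublist hsub

theorem snd_inj (P : List (Int × Int)) (hnd : (P.map Prod.snd).Nodup)
    {y z : Int × Int} (hy : y ∈ P) (hz : z ∈ P) (h : y.2 = z.2) : y = z := by
  obtain ⟨i, hi, hie⟩ := List.getElem_of_mem hy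
  obtain ⟨j, hj, hje⟩ := List.getElem_of_mem hz
  have h1 : posOf P (P[i].2) = i := posOf_eq P hnd i hi
  have h2 : posOf P (P[j].2) = j := posOf_eq P hnd j hj
  have hi' : posOf P y.2 = i := by rw [← hie]; exact h1
  have hj' : posOf P z.2 = j := by rw [← hje]; exact h2
  have hij : i = j := by rw [← hi', ← hj', h]
  subst hij
  rw [← hie, ← hje]

theorem x_mem_chain_child (P : List (Int × Int)) (root : Int) (keys : List Int)
    (H : BfsOut root keys P) {x c : Int} (hc : c ∈ chOf P x) :
    x ∈ chainC P root c := by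
  have hcp : (x, c) ∈ P := (mem_chOf P x c).1 hc
  have hcn : IsNode P root c := snd_isNode P root hcp
  rw [chain_unfold P root keys H c hcn, if_neg (H.nroot _ hcp),
    parOf_eq P root H.nodupSnd hcp]
  exact List.mem_cons.2 (Or.inr (chain_self P root x))

theorem mem_expC_char (P : List (Int × Int)) (root : Int) (keys : List Int)
    (H : BfsOut root keys P) :
    ∀ (r : Nat) (x : Int), IsNode P root x → mE P root x ≤ r →
    ∀ (p : Int) (y : Int × Int), y ∈ expC P root (p, x) →
    y = (p, x) ∨ (y ∈ P ∧ x ∈ chainC P root y.2 ∧ rposOf P root x < rposOf P root y.2) := by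
  intro r
  induction r with
  | zero =>
    intro x hx hr
    have := mE_pos P root x hx
    omega
  | succ r ih =>
    intro x hx hr p y hy
    rw [exp_unfold P root keys H p x hx] at hy
    rcases List.mem_append.1 hy with hy | hy
    · right
      obtain ⟨c, hcrev, hyc⟩ := List.mem_flatMap.1 hy
      have hc : c ∈ chOf P x := List.mem_reverse.1 hcrev
      have hcp : (x, c) ∈ P := (mem_chOf P x c).1 hc
      have hcn : IsNode P root c := snd_isNode P root hcp
      have hrc := rposOf_lt P root keys H hcp
      rcases ih c hcn (by have := mE_child P root keys H hc hx; omega) x y hyc with rfl | ⟨h1, h2, h3⟩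
      · exact ⟨hcp, x_mem_chain_child P root keys H hc, hrc⟩
      · refine ⟨h1, ?_, by omega⟩
        exact chain_trans P root keys H (snd_isNode P root h1) h2
          (x_mem_chain_child P root keys H hc)
    · exact Or.inl (List.mem_singleton.1 hy)

theorem mem_coreE_char (P : List (Int × Int)) (root : Int) (keys : List Int)
    (H : BfsOut root keys P) {x : Int} (hx : IsNode P root x) {y : Int × Int}
    (hy : y ∈ coreE P root x) :
    y ∈ P ∧ x ∈ chainC P root y.2 ∧ rposOf P root x < rposOf P root y.2 := by
  obtain ⟨c, hcrev, hyc⟩ := List.mem_flatMap.1 hy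
  have hc : c ∈ chOf P x := List.mem_reverse.1 hcrev
  have hcp : (x, c) ∈ P := (mem_chOf P x c).1 hc
  have hcn : IsNode P root c := snd_isNode P root hcp
  have hrc := rposOf_lt P root keys H hcp
  rcases mem_expC_char P root keys H (mE P root c) c hcn le_rfl x y hyc with rfl | ⟨h1, h2, h3⟩
  · exact ⟨hcp, x_mem_chain_child P root keys H hc, hrc⟩
  · refine ⟨h1, ?_, by omega⟩
    exact chain_trans P root keys H (snd_isNode P root h1) h2
      (x_mem_chain_child P root keys H hc)

theorem chainC_root_eq (P : List (Int × Int)) (root : Int) (keys : List Int)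
    (H : BfsOut root keys P) : chainC P root root = [root] := by
  rw [chain_unfold P root keys H root (Or.inl rfl), if_pos rfl]

theorem chain_ascend (P : List (Int × Int)) (root : Int) (keys : List Int)
    (H : BfsOut root keys P) :
    ∀ (r : Nat) (d x : Int), d ∈ P.map Prod.snd → rposOf P root d ≤ r →
    x ∈ chainC P root d → x ≠ d →
    ∃ c ∈ chOf P x, c ∈ chainC P root d := by
  intro r
  induction r with
  | zero =>
    intro d x hd hr _ _
    have hdr : d ≠ root := by
      intro hcon
      obtain ⟨pr, hpr, hpr2⟩ := List.mem_map.1 hd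
      exact H.nroot pr hpr (hpr2.trans hcon)
    have := rposOf_pos P root d hdr
    omega
  | succ r ih =>
    intro d x hd hr hx hxd
    have hdn : IsNode P root d := Or.inr hd
    have hdr : d ≠ root := by
      intro hcon
      obtain ⟨pr, hpr, hpr2⟩ := List.mem_map.1 hd
      exact H.nroot pr hpr (hpr2.trans hcon)
    have hpp := parOf_pair P root d hd
    have hplt := rposOf_lt P root keys H hpp
    rw [chain_unfold P root keys H d hdn, if_neg hdr] at hx
    rcases List.mem_cons.1 hx with rfl | hx'
    · exact absurd rfl hxd
    · by_cases hpx : parOf P root d = x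
      · refine ⟨d, (mem_chOf P x d).2 (by rw [← hpx]; exact hpp), chain_self P root d⟩
      · have hpn := fst_isNode P root keys H hpp
        rcases hpn with hproot | hps
        · rw [hproot] at hx'
          rw [chainC_root_eq P root keys H] at hx'
          have : x = root := by simpa using hx'
          rw [hproot] at hpx
          exact absurd this.symm hpx
        · obtain ⟨c, hc1, hc2⟩ := ih (parOf P root d) x hps (by omega) hx'
            (fun hh => hpx hh.symm)
          refine ⟨c, hc1, ?_⟩
          rw [chain_unfold P root keys H d hdn, if_neg hdr]
          exact List.mem_cons.2 (Or.inr hc2)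

theorem mem_coreE_of (P : List (Int × Int)) (root : Int) (keys : List Int)
    (H : BfsOut root keys P) :
    ∀ (k : Nat) (y : Int × Int) (x : Int), y ∈ P → IsNode P root x →
    x ∈ chainC P root y.2 → x ≠ y.2 →
    rposOf P root y.2 - rposOf P root x ≤ k →
    y ∈ coreE P root x := by
  intro k
  induction k with
  | zero =>
    intro y x hy hxn hx hxy hk
    have hyd : y.2 ∈ P.map Prod.snd := List.mem_map.2 ⟨y, hy, rfl⟩
    have hydn : IsNode P root y.2 := Or.inr hyd
    have hyr : y.2 ≠ root := H.nroot y hy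
    rw [chain_unfold P root keys H y.2 hydn, if_neg hyr] at hx
    rcases List.mem_cons.1 hx with hh | hx'
    · exact absurd hh hxy
    · have hpp := parOf_pair P root y.2 hyd
      have hplt := rposOf_lt P root keys H hpp
      have hpn := fst_isNode P root keys H hpp
      have := (chain_isNode P root keys H hpn hx').2
      omega
  | succ k ih =>
    intro y x hy hxn hx hxy hk
    have hyd : y.2 ∈ P.map Prod.snd := List.mem_map.2 ⟨y, hy, rfl⟩
    obtain ⟨c, hc, hcchain⟩ := chain_ascend P root keys H (rposOf P root y.2) y.2 x hyd
      le_rfl hx hxy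
    have hcp : (x, c) ∈ P := (mem_chOf P x c).1 hc
    have hcn : IsNode P root c := snd_isNode P root hcp
    have hrc := rposOf_lt P root keys H hcp
    have hcrev : c ∈ (chOf P x).reverse := List.mem_reverse.2 hc
    by_cases hcy : c = y.2
    · -- y is the pair (x, c) itself
      have hyx : y = (x, c) := by
        refine snd_inj P H.nodupSnd hy hcp ?_
        rw [hcy]
      rw [hyx]
      refine List.mem_flatMap.2 ⟨c, hcrev, ?_⟩
      rw [exp_unfold P root keys H x c hcn]
      simp
    · have hrcy : rposOf P root c ≤ rposOf P root y.2 :=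
        (chain_isNode P root keys H (Or.inr hyd) hcchain).2
      have hyc : y ∈ coreE P root c := by
        refine ih y c hy hcn hcchain hcy (by omega)
      refine List.mem_flatMap.2 ⟨c, hcrev, ?_⟩
      rw [exp_unfold P root keys H x c hcn]
      exact List.mem_append.2 (Or.inl hyc)

theorem mem_coreE_root (P : List (Int × Int)) (root : Int) (keys : List Int)
    (H : BfsOut root keys P) {y : Int × Int} (hy : y ∈ P) :
    y ∈ coreE P root root := by
  have hydn : IsNode P root y.2 := snd_isNode P root hy
  refine mem_coreE_of P root keys H (rposOf P root y.2) y root hy (Or.inl rfl)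
    (chain_root P root keys H hydn) (fun hh => H.nroot y hy hh.symm) (by omega)

theorem elem_facts (P : List (Int × Int)) (root : Int) (keys : List Int)
    (H : BfsOut root keys P) {x c : Int} (hc : c ∈ chOf P x) {y : Int × Int}
    (hy : y ∈ expC P root (x, c)) :
    y ∈ P ∧ c ∈ chainC P root y.2 ∧ rposOf P root c ≤ rposOf P root y.2 := by
  have hcp : (x, c) ∈ P := (mem_chOf P x c).1 hc
  have hcn : IsNode P root c := snd_isNode P root hcp
  rcases mem_expC_char P root keys H (mE P root c) c hcn le_rfl x y hy with rfl | ⟨h1, h2, h3⟩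
  · exact ⟨hcp, chain_self P root c, le_rfl⟩
  · exact ⟨h1, h2, le_of_lt h3⟩

theorem cross_ok (P : List (Int × Int)) (root : Int) (keys : List Int)
    (H : BfsOut root keys P) {x c c' : Int}
    (hc : c ∈ chOf P x) (hc' : c' ∈ chOf P x) (hne : c ≠ c')
    {y z : Int × Int} (hy : y ∈ expC P root (x, c)) (hz : z ∈ expC P root (x, c')) :
    OkPair y z := by
  have hcp : (x, c) ∈ P := (mem_chOf P x c).1 hc
  have hcp' : (x, c') ∈ P := (mem_chOf P x c').1 hc'
  have hcn' : IsNode P root c' := snd_isNode P root hcp'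
  obtain ⟨hyP, hyc, hyr⟩ := elem_facts P root keys H hc hy
  have hyn : IsNode P root y.2 := snd_isNode P root hyP
  have hrcx := rposOf_lt P root keys H hcp
  have hsnd : y.2 ≠ z.2 := by
    intro heq
    obtain ⟨hzP, hzc, hzr⟩ := elem_facts P root keys H hc' hz
    rw [← heq] at hzc
    rcases chain_linear P root keys H hyn hyc hzc with h | h
    · exact sibling_not_chain P root keys H hc hc' hne h
    · exact sibling_not_chain P root keys H hc' hc (Ne.symm hne) h
  refine ⟨?_, hsnd⟩
  rcases mem_expC_char P root keys H (mE P root c') c' hcn' le_rfl x z hz with rfl | ⟨h1, h2, h3⟩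
  · intro heq
    simp only at heq
    rw [heq] at hyr
    omega
  · intro heq
    have hpz : parOf P root z.2 = z.1 := parOf_eq P root H.nodupSnd h1
    have hzn : IsNode P root z.2 := snd_isNode P root h1
    have hzroot : z.2 ≠ root := H.nroot z h1
    rw [chain_unfold P root keys H z.2 hzn, if_neg hzroot, hpz] at h2
    rcases List.mem_cons.1 h2 with hh | hh
    · rw [hh] at h3; omega
    · rw [← heq] at hh
      rcases chain_linear P root keys H hyn hyc hh with h | h
      · exact sibling_not_chain P root keys H hc hc' hne h
      · exact sibling_not_chain P root keys H hc' hc (Ne.symm hne) h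

theorem exp_good (P : List (Int × Int)) (root : Int) (keys : List Int)
    (H : BfsOut root keys P) :
    ∀ (r : Nat) (x : Int), IsNode P root x → mE P root x ≤ r →
    ∀ p, rposOf P root p ≤ rposOf P root x →
    ((expC P root (p, x)).map Prod.snd).Nodup ∧ (expC P root (p, x)).Pairwise OkPair := by
  intro r
  induction r with
  | zero =>
    intro x hx hr
    have := mE_pos P root x hx
    omega
  | succ r ih =>
    intro x hx hr p hp
    -- first: the flattened branch list is good
    have branch : ∀ (cs : List Int), cs.Nodup → (∀ c ∈ cs, c ∈ chOf P x) →
        (((cs.flatMap (fun c => expC P root (x, c))).map Prod.snd).Nodup ∧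
          (cs.flatMap (fun c => expC P root (x, c))).Pairwise OkPair) := by
      intro cs
      induction cs with
      | nil => intro _ _; exact ⟨List.Pairwise.nil, List.Pairwise.nil⟩
      | cons c cs ihcs =>
        intro hnd hmem
        have hc : c ∈ chOf P x := hmem c (by simp)
        have hcp : (x, c) ∈ P := (mem_chOf P x c).1 hc
        have hcn : IsNode P root c := snd_isNode P root hcp
        have hrcx := rposOf_lt P root keys H hcp
        obtain ⟨ih1, ih2⟩ := ih c hcn
          (by have := mE_child P root keys H hc hx; omega) x (le_of_lt hrcx)
        obtain ⟨ihr1, ihr2⟩ := ihcs (List.nodup_cons.1 hnd).2 (fun q hq => hmem q (by simp [hq]))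
        have hcross : ∀ y ∈ expC P root (x, c),
            ∀ z ∈ cs.flatMap (fun c' => expC P root (x, c')), OkPair y z := by
          intro y hy z hz
          obtain ⟨c', hc's, hz'⟩ := List.mem_flatMap.1 hz
          have hnec : c ≠ c' := fun hh => (List.nodup_cons.1 hnd).1 (hh ▸ hc's)
          exact cross_ok P root keys H hc (hmem c' (by simp [hc's])) hnec hy hz'
        constructor
        · simp only [List.flatMap_cons, List.map_append]
          refine List.nodup_append.2 ⟨ih1, ihr1, ?_⟩
          intro a ha b hb hab
          obtain ⟨y, hy, rfl⟩ := List.mem_map.1 ha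
          obtain ⟨z, hz, hzb⟩ := List.mem_map.1 hb
          exact (hcross y hy z hz).2 (by rw [hab, hzb])
        · simp only [List.flatMap_cons]
          exact List.pairwise_append.2 ⟨ih2, ihr2, hcross⟩
    obtain ⟨b1, b2⟩ := branch (chOf P x).reverse
      (List.nodup_reverse.2 (chOf_nodup P root keys H x)) (fun c hc => List.mem_reverse.1 hc)
    rw [exp_unfold P root keys H p x hx]
    have hcore : ∀ y ∈ coreE P root x, rposOf P root x < rposOf P root y.2 :=
      fun y hy => (mem_coreE_char P root keys H hx hy).2.2
    constructor
    · simp only [List.map_append]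
      refine List.nodup_append.2 ⟨b1, by simp, ?_⟩
      intro a ha b hb hab
      obtain ⟨y, hy, rfl⟩ := List.mem_map.1 ha
      have hbx : b = x := by simpa using hb
      have := hcore y hy
      rw [hab, hbx] at this
      omega
    · refine List.pairwise_append.2 ⟨b2, by simp, ?_⟩
      intro y hy z hz
      have hzpx : z = (p, x) := by simpa using hz
      have h1 := hcore y hy
      rw [hzpx]
      refine ⟨fun heq => ?_, fun heq => ?_⟩
      · simp only at heq
        rw [heq] at h1
        omega
      · simp only at heq
        rw [heq] at h1
        omega

theorem coreE_good (P : List (Int × Int)) (root : Int) (keys : List Int)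
    (H : BfsOut root keys P) :
    ((coreE P root root).map Prod.snd).Nodup ∧ (coreE P root root).Pairwise OkPair := by
  obtain ⟨h1, h2⟩ := exp_good P root keys H (mE P root root) root (Or.inl rfl) le_rfl
    root le_rfl
  rw [exp_unfold P root keys H root root (Or.inl rfl)] at h1 h2
  constructor
  · rw [List.map_append] at h1
    exact (List.nodup_append.1 h1).1
  · exact (List.pairwise_append.1 h2).1

theorem coreE_sub (P : List (Int × Int)) (root : Int) (keys : List Int)
    (H : BfsOut root keys P) {y : Int × Int} (hy : y ∈ coreE P root root) : y ∈ P :=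
  (mem_coreE_char P root keys H (Or.inl rfl) hy).1

theorem coreE_perm (P : List (Int × Int)) (root : Int) (keys : List Int)
    (H : BfsOut root keys P) : (coreE P root root).Perm P := by
  refine (List.perm_ext_iff_of_nodup ?_ ?_).2 ?_
  · exact ((coreE_good P root keys H).1).of_map Prod.snd
  · exact H.nodupSnd.of_map Prod.snd
  · intro y
    exact ⟨fun hy => coreE_sub P root keys H hy, fun hy => mem_coreE_root P root keys H hy⟩

theorem validL_coreE (P : List (Int × Int)) (root : Int) (keys : List Int)
    (H : BfsOut root keys P) : ValidL (coreE P root root) :=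
  ⟨(coreE_good P root keys H).2,
    fun pr hpr => H.distinct pr (coreE_sub P root keys H hpr)⟩

theorem validL_reverse (P : List (Int × Int)) (root : Int) (keys : List Int)
    (H : BfsOut root keys P) : ValidL P.reverse := by
  constructor
  · rw [List.pairwise_reverse]
    rw [List.pairwise_iff_getElem]
    intro i j hi hj hij
    have hsnd : ∀ a b, ∀ (ha : a < P.length) (hb : b < P.length), a ≠ b →
        P[a].2 ≠ P[b].2 := by
      intro a b ha hb hab heq
      have h1 : (P.map Prod.snd)[a]'(by simpa using ha) =
          (P.map Prod.snd)[b]'(by simpa using hb) := by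
        simp only [List.getElem_map]
        exact heq
      exact hab (List.Nodup.getElem_inj_iff H.nodupSnd |>.1 h1)
    constructor
    · -- P[j].2 ≠ P[i].1
      rcases H.anch i hi with hh | ⟨k, hk, hki, hke⟩
      · rw [hh]
        exact H.nroot P[j] (List.getElem_mem hj)
      · rw [← hke]
        exact hsnd j k hj hk (by omega)
    · exact hsnd j i hj hi (by omega)
  · intro pr hpr
    exact H.distinct pr (List.mem_reverse.1 hpr)

-- ---------- dfs run = fold of the emission list ----------

/-- B's guarded aggregation step on the concrete state. -/
def stepC (root : Int) (s : Int × List Int) (pr : Int × Int) : Int × List Int :=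
  if pr.2 ≠ root then
    (s.1 + |s.2.getD pr.2.toNat 0|,
      (s.2.modify pr.1.toNat (· + s.2.getD pr.2.toNat 0)).set pr.2.toNat 0)
  else s

theorem dfs_nil (ch : PySem.Dict Int (List Int)) (root : Int) (f : Nat) (s : Int × List Int) :
    dfsLoopB ch root f [] s = s := by
  cases f <;> rfl

theorem dfs_enter (ch : PySem.Dict Int (List Int)) (root : Int) (f : Nat)
    (p x : Int) (rest : List (Int × Int × Bool)) (s : Int × List Int) :
    dfsLoopB ch root (f + 1) ((p, x, true) :: rest) s =
      dfsLoopB ch root f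
        ((ch.getD x []).reverse.map (fun c => (x, c, true)) ++ (p, x, false) :: rest) s := by
  simp only [dfsLoopB, if_pos]
  rw [foldl_cons_eq_reverse_map]

theorem dfs_exit (ch : PySem.Dict Int (List Int)) (root : Int) (f : Nat)
    (p x : Int) (rest : List (Int × Int × Bool)) (s : Int × List Int) :
    dfsLoopB ch root (f + 1) ((p, x, false) :: rest) s =
      dfsLoopB ch root f rest (stepC root s (p, x)) := by
  simp only [dfsLoopB, Bool.false_eq_true, if_false, stepC]

theorem dfs_run (P : List (Int × Int)) (root : Int) (keys : List Int)
    (H : BfsOut root keys P) (children : PySem.Dict Int (List Int))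
    (hch : ∀ z, children.getD z [] = chOf P z) :
    ∀ (r : Nat) (x : Int), IsNode P root x → mE P root x ≤ r →
    ∀ (p : Int) (rest : List (Int × Int × Bool)) (s : Int × List Int) (extra : Nat),
    dfsLoopB children root (extra + 2 * (expC P root (p, x)).length) ((p, x, true) :: rest) s
      = dfsLoopB children root extra rest ((expC P root (p, x)).foldl (stepC root) s) := by
  intro r
  induction r with
  | zero =>
    intro x hx hr
    have := mE_pos P root x hx
    omega
  | succ r ih =>
    intro x hx hr p rest s extra
    have hexp := exp_unfold P root keys H p x hx
    -- inner: process a block of sibling subtrees on the stack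
    have inner : ∀ (cs : List Int), (∀ c ∈ cs, c ∈ chOf P x) →
        ∀ (rest' : List (Int × Int × Bool)) (s' : Int × List Int) (extra' : Nat),
        dfsLoopB children root
            (extra' + 2 * (cs.flatMap (fun c => expC P root (x, c))).length)
            (cs.map (fun c => (x, c, true)) ++ rest') s'
          = dfsLoopB children root extra' rest'
            ((cs.flatMap (fun c => expC P root (x, c))).foldl (stepC root) s') := by
      intro cs
      induction cs with
      | nil => intro _ rest' s' extra'; simp
      | cons c cs ihcs =>
        intro hmem rest' s' extra'
        have hc : c ∈ chOf P x := hmem c (by simp)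
        have hcp : (x, c) ∈ P := (mem_chOf P x c).1 hc
        have hcn : IsNode P root c := snd_isNode P root hcp
        have hmc : mE P root c ≤ r := by
          have := mE_child P root keys H hc hx; omega
        simp only [List.flatMap_cons, List.map_cons, List.cons_append, List.length_append]
        have harith : extra' + 2 * ((expC P root (x, c)).length +
            (cs.flatMap (fun c => expC P root (x, c))).length) =
            (extra' + 2 * (cs.flatMap (fun c => expC P root (x, c))).length) +
              2 * (expC P root (x, c)).length := by ring
        rw [harith]
        rw [ih c hcn hmc x (cs.map (fun c => (x, c, true)) ++ rest') s'
          (extra' + 2 * (cs.flatMap (fun c => expC P root (x, c))).length)]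
        rw [ihcs (fun q hq => hmem q (by simp [hq])) rest' _ extra']
        rw [List.foldl_append]
    -- assemble: one enter step, the sibling blocks, one exit step
    have hlen : (expC P root (p, x)).length = (coreE P root x).length + 1 := by
      rw [hexp]; simp
    have harith2 : extra + 2 * (expC P root (p, x)).length =
        ((extra + 1) + 2 * (coreE P root x).length) + 1 := by
      rw [hlen]; ring
    rw [harith2, dfs_enter, hch x]
    rw [show coreE P root x = (chOf P x).reverse.flatMap (fun c => expC P root (x, c)) from rfl]
    rw [show (chOf P x).reverse.map (fun c => (x, c, true)) ++ (p, x, false) :: rest =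
      (chOf P x).reverse.map (fun c => (x, c, true)) ++ ((p, x, false) :: rest) from rfl]
    rw [inner (chOf P x).reverse (fun c hc => List.mem_reverse.1 hc)
      ((p, x, false) :: rest) s (extra + 1)]
    rw [dfs_exit, hexp, List.foldl_append]
    simp only [List.foldl_cons, List.foldl_nil]
    rfl

-- ---------- bridges between concrete folds and the abstract fold ----------

theorem foldA_abs (n : Nat) :
    ∀ (L : List (Int × Int)) (ans : Int) (arr : List Int) (f : Int → Int),
    arr.length = n → (∀ pr ∈ L, InR' n pr.1 ∧ InR' n pr.2 ∧ pr.1 ≠ pr.2) →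
    (∀ x, InR' n x → arr.getD x.toNat 0 = f x) →
    (L.foldl (fun (s : Int × List Int) pr =>
        let val := s.2.getD pr.2.toNat 0
        (s.1 + |val|,
          (s.2.modify pr.2.toNat (· + (-1 * val))).modify pr.1.toNat (· + val)))
      (ans, arr)).1 = (L.foldl stepF (ans, f)).1 := by
  intro L
  induction L with
  | nil => intro ans arr f _ _ _; rfl
  | cons pr L ih =>
    intro ans arr f hlen hok hrel
    obtain ⟨hp, hc, hpc⟩ := hok pr (by simp)
    have hplen : pr.1.toNat < arr.length := by
      obtain ⟨h1, h2⟩ := hp; omega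
    have hclen : pr.2.toNat < arr.length := by
      obtain ⟨h1, h2⟩ := hc; omega
    simp only [List.foldl_cons]
    have hval : arr.getD pr.2.toNat 0 = f pr.2 := hrel pr.2 hc
    have harr2len :
        ((arr.modify pr.2.toNat (· + (-1 * arr.getD pr.2.toNat 0))).modify pr.1.toNat
          (· + arr.getD pr.2.toNat 0)).length = n := by
      simp [List.length_modify, hlen]
    have hmain := ih (ans + |arr.getD pr.2.toNat 0|) _ ((stepF (ans, f) pr).2) harr2len
      (fun q hq => hok q (by simp [hq])) ?_
    · rw [hmain, hval]; rfl
    · intro x hx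
      have hxlen : x.toNat < arr.length := by obtain ⟨h1, h2⟩ := hx; omega
      have hlen1 : (arr.modify pr.2.toNat (· + (-1 * arr.getD pr.2.toNat 0))).length
          = arr.length := by simp [List.length_modify]
      rw [getD_modify_int _ pr.1 x _ hp.1 (by omega) hx.1 (by omega)]
      rw [getD_modify_int _ pr.2 x _ hc.1 hclen hx.1 hxlen]
      by_cases hxc : x = pr.2
      · rw [if_neg (show ¬ x = pr.1 by rw [hxc]; exact fun h => hpc h.symm), if_pos hxc]
        simp only [stepF, if_pos hxc]
        rw [hxc]; ring
      · by_cases hxp : x = pr.1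
        · rw [if_pos hxp, if_neg hxc]
          simp only [stepF, if_neg hxc, if_pos hxp]
          rw [hval, show arr.getD x.toNat 0 = f pr.1 by rw [hrel x hx, hxp]]
        · rw [if_neg hxp, if_neg hxc]
          simp only [stepF, if_neg hxc, if_neg hxp]
          exact hrel x hx

theorem foldC_abs (n : Nat) (root : Int) :
    ∀ (L : List (Int × Int)) (ans : Int) (arr : List Int) (f : Int → Int),
    arr.length = n → (∀ pr ∈ L, InR' n pr.1 ∧ InR' n pr.2 ∧ pr.1 ≠ pr.2) →
    (∀ pr ∈ L, pr.2 ≠ root) →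
    (∀ x, InR' n x → arr.getD x.toNat 0 = f x) →
    (L.foldl (stepC root) (ans, arr)).1 = (L.foldl stepF (ans, f)).1 := by
  intro L
  induction L with
  | nil => intro ans arr f _ _ _ _; rfl
  | cons pr L ih =>
    intro ans arr f hlen hok hnr hrel
    obtain ⟨hp, hc, hpc⟩ := hok pr (by simp)
    have hplen : pr.1.toNat < arr.length := by obtain ⟨h1, h2⟩ := hp; omega
    have hclen : pr.2.toNat < arr.length := by obtain ⟨h1, h2⟩ := hc; omega
    simp only [List.foldl_cons]
    have hval : arr.getD pr.2.toNat 0 = f pr.2 := hrel pr.2 hc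
    have hstep : stepC root (ans, arr) pr =
        (ans + |arr.getD pr.2.toNat 0|,
          (arr.modify pr.1.toNat (· + arr.getD pr.2.toNat 0)).set pr.2.toNat 0) := by
      simp [stepC, hnr pr (by simp)]
    rw [hstep]
    have hlen2 : ((arr.modify pr.1.toNat (· + arr.getD pr.2.toNat 0)).set pr.2.toNat 0).length
        = n := by simp [List.length_modify, hlen]
    have hmain := ih (ans + |arr.getD pr.2.toNat 0|) _ ((stepF (ans, f) pr).2) hlen2
      (fun q hq => hok q (by simp [hq])) (fun q hq => hnr q (by simp [hq])) ?_
    · rw [hmain, hval]; rfl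
    · intro x hx
      have hxlen : x.toNat < arr.length := by obtain ⟨h1, h2⟩ := hx; omega
      have hlen1 : (arr.modify pr.1.toNat (· + arr.getD pr.2.toNat 0)).length = arr.length := by
        simp [List.length_modify]
      rw [getD_set_int _ pr.2 x _ hc.1 (by omega) hx.1 (by omega)]
      rw [getD_modify_int _ pr.1 x _ hp.1 hplen hx.1 hxlen]
      by_cases hxc : x = pr.2
      · rw [if_pos hxc]
        simp [stepF, if_pos hxc]
      · rw [if_neg hxc]
        by_cases hxp : x = pr.1
        · rw [if_pos hxp]
          simp only [stepF, if_neg hxc, if_pos hxp]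
          rw [hval, show arr.getD x.toNat 0 = f pr.1 by rw [hrel x hx, hxp]]
        · rw [if_neg hxp]
          simp only [stepF, if_neg hxc, if_neg hxp]
          exact hrel x hx

-- ---------- final assembly ----------

theorem solution_eq_fold (a : List Int) (edges : List (List Int)) (hs : a.sum = 0) :
    solution a edges =
      ((bfsLoopA ((buildGraphA edges).insert (minDegKey (buildGraphA edges))
          (getAdj (buildGraphA edges) (minDegKey (buildGraphA edges))).tail)
          (a.length + 1)
          (((List.replicate a.length false).set (minDegKey (buildGraphA edges)).toNat
              true).set ((getAdj (buildGraphA edges)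
                (minDegKey (buildGraphA edges))).headD 0).toNat true)
          [(minDegKey (buildGraphA edges),
            (getAdj (buildGraphA edges) (minDegKey (buildGraphA edges))).headD 0)]
          []).reverse.foldl
        (fun (s : Int × List Int) pr =>
          let val := s.2.getD pr.2.toNat 0
          (s.1 + |val|,
            (s.2.modify pr.2.toNat (· + (-1 * val))).modify pr.1.toNat (· + val)))
        (0, a)).1 := by
  unfold solution bfsA
  rw [if_neg (by simp [hs])]

theorem solution_alt_eq_dfs (a : List Int) (edges : List (List Int)) (hs : a.sum = 0) :
    solution_alt a edges =
      (dfsLoopB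
        (buildChildren (bfsLoopB (buildGraphB edges) (a.length + 1)
          (PySem.Set.add (PySem.Set.add PySem.Set.empty (minDegKey (buildGraphB edges)))
            ((getAdj (buildGraphB edges) (minDegKey (buildGraphB edges))).headD 0))
          [(minDegKey (buildGraphB edges),
            (getAdj (buildGraphB edges) (minDegKey (buildGraphB edges))).headD 0)]
          []))
        (minDegKey (buildGraphB edges)) (2 * a.length + 2)
        [(minDegKey (buildGraphB edges), minDegKey (buildGraphB edges), true)]
        (0, a)).1 := by
  unfold solution_alt
  rw [if_neg (by simp [hs])]

-- ===== VERDICT (by name: the statement is the Claim_ definition above) =====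
theorem solution_spec : Claim_equal_solution := by
  unfold Claim_equal_solution
  intro a edges _ hpre
  unfold Spec_solution
  by_cases hs : a.sum = 0
  · rcases hpre with hsum | ⟨hne, hok⟩
    · exact absurd hs hsum
    obtain ⟨hkr, hadj, hnn, hne', hnd⟩ := build_facts edges a.length hok
    obtain ⟨hkeq, haeq⟩ := build_eq edges
    have hkeysne : (buildGraphA edges).keys ≠ [] := hne' hne
    have hrootmem : minDegKey (buildGraphA edges) ∈ (buildGraphA edges).keys :=
      minDegKey_mem _ hkeysne
    have hmin : minDegKey (buildGraphA edges) = minDegKey (buildGraphB edges) :=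
      minDegKey_congr _ _ hkeq haeq
    set n := a.length with hn
    set root := minDegKey (buildGraphA edges) with hroot
    have hadjne : getAdj (buildGraphA edges) root ≠ [] := hnn root hrootmem
    set first := (getAdj (buildGraphA edges) root).headD 0 with hfirst
    have hfmem : first ∈ getAdj (buildGraphA edges) root := by
      rcases hadj2 : getAdj (buildGraphA edges) root with _ | ⟨z, zs⟩
      · exact absurd hadj2 hadjne
      · rw [hfirst, hadj2]; simp
    obtain ⟨hfk, _, hfne⟩ := hadj root first hfmem
    have hrootR : InR' n root := hkr root hrootmem
    have hfirstR : InR' n first := hkr first hfk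
    -- facts transported to the B graph
    have hkrB : ∀ k ∈ (buildGraphB edges).keys, InR' n k := by
      rw [← hkeq]; exact hkr
    have hadjB : ∀ k x, x ∈ getAdj (buildGraphB edges) k →
        x ∈ (buildGraphB edges).keys ∧ k ∈ (buildGraphB edges).keys ∧ x ≠ k := by
      intro k x hx
      rw [← haeq] at hx
      obtain ⟨h1, h2, h3⟩ := hadj k x hx
      rw [hkeq] at h1 h2
      exact ⟨h1, h2, h3⟩
    have hG' : ∀ k, k ≠ root →
        getAdj ((buildGraphA edges).insert root (getAdj (buildGraphA edges) root).tail) k =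
          getAdj (buildGraphB edges) k := by
      intro k hk
      rw [getAdj, PySem.Dict.getD_insert, if_neg hk, ← haeq k]
      rfl
    -- initial BFS state
    set visited0 := ((List.replicate n false).set root.toNat true).set first.toNat true
      with hv0
    set seen0 := PySem.Set.add (PySem.Set.add PySem.Set.empty root) first with hs0
    have hlen0 : visited0.length = n := by simp [hv0]
    have hlen0' : ((List.replicate n false).set root.toNat true).length = n := by simp
    have hrepl : ∀ i : Nat, (List.replicate n false).getD i false = false := by
      intro i
      simp [List.getD_eq_getElem?_getD, List.getElem?_replicate]
      split_ifs <;> rfl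
    have hmem0 : ∀ x, x ∈ seen0 ↔ x = root ∨ x = first := by
      intro x
      rw [hs0, PySem.Set.mem_add, PySem.Set.mem_add]
      constructor
      · rintro ((h | h) | h)
        · exact absurd h (List.not_mem_nil)
        · exact Or.inl h
        · exact Or.inr h
      · rintro (h | h)
        · exact Or.inl (Or.inr h)
        · exact Or.inr h
    have hrel0 : ∀ x ∈ (buildGraphB edges).keys,
        seen0.contains x = visited0.getD x.toNat false := by
      intro x hx
      have hxr : InR' n x := hkrB x hx
      rw [hv0, getD_set_poly _ first x _ _ hfirstR.1
        (by obtain ⟨h1, h2⟩ := hfirstR; omega) hxr.1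
        (by obtain ⟨h1, h2⟩ := hxr; rw [hlen0']; omega)]
      by_cases hxf : x = first
      · rw [if_pos hxf]
        exact (PySem.Set.contains_iff _ x).2 ((hmem0 x).2 (Or.inr hxf))
      · rw [if_neg hxf, getD_set_poly _ root x _ _ hrootR.1
          (by obtain ⟨h1, h2⟩ := hrootR; simp; omega) hxr.1
          (by obtain ⟨h1, h2⟩ := hxr; simp; omega)]
        by_cases hxroot : x = root
        · rw [if_pos hxroot]
          exact (PySem.Set.contains_iff _ x).2 ((hmem0 x).2 (Or.inl hxroot))
        · rw [if_neg hxroot, hrepl]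
          rcases hcc : seen0.contains x with _ | _
          · rfl
          · rcases (hmem0 x).1 ((PySem.Set.contains_iff _ x).1 hcc) with h | h
            · exact absurd h hxroot
            · exact absurd h hxf
    have hseen0 : ∀ x, x ∈ seen0 ↔
        (x = root ∨ x ∈ (([] ++ [(root, first)]).map Prod.snd : List Int)) := by
      intro x
      rw [hmem0 x]
      simp
    have hout0 : BfsOut root (buildGraphB edges).keys ([] ++ [(root, first)]) := by
      constructor
      · simp
      · intro pr hpr
        have : pr = (root, first) := by simpa using hpr
        rw [this]
        exact hfne
      · intro i hi
        left
        have : i = 0 := by simp at hi; omega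
        subst this
        rfl
      · intro pr hpr
        have : pr = (root, first) := by simpa using hpr
        rw [this]
        exact Ne.symm hfne
      · intro pr hpr
        have hpr2 : pr = (root, first) := by simpa using hpr
        rw [hpr2]
        refine ⟨?_, by rw [← hkeq]; exact hfk⟩
        rw [← hkeq]
        exact hrootmem
    obtain ⟨hloopEq, HP⟩ := bfs_main (buildGraphB edges)
      ((buildGraphA edges).insert root (getAdj (buildGraphA edges) root).tail) root n
      hkrB hadjB hG' (n + 1) visited0 seen0 [(root, first)] [] hlen0 hrel0 hseen0 hout0
    set P := bfsLoopA ((buildGraphA edges).insert root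
      (getAdj (buildGraphA edges) root).tail) (n + 1) visited0 [(root, first)] [] with hP
    -- the two ports compute folds over this data
    rw [solution_eq_fold a edges hs, solution_alt_eq_dfs a edges hs]
    rw [← hmin, ← haeq]
    rw [← hroot, ← hfirst, ← hn, ← hs0, ← hv0, ← hP, ← hloopEq]
    -- abstract both sides
    have hPmem : ∀ pr ∈ P, InR' n pr.1 ∧ InR' n pr.2 ∧ pr.1 ≠ pr.2 := by
      intro pr hpr
      obtain ⟨h1, h2⟩ := HP.keysMem pr hpr
      exact ⟨hkrB _ h1, hkrB _ h2, HP.distinct pr hpr⟩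
    have hArel : ∀ x, InR' n x → a.getD x.toNat 0 = a.getD x.toNat 0 := fun _ _ => rfl
    have hAside := foldA_abs n P.reverse 0 a (fun x => a.getD x.toNat 0) hn.symm
      (fun pr hpr => hPmem pr (List.mem_reverse.1 hpr)) hArel
    rw [hAside]
    -- B side: DFS = fold over the emission list
    have hch : ∀ z, (buildChildren P).getD z [] = chOf P z :=
      fun z => buildChildren_getD P z
    have hPlen : P.length ≤ n := by
      have := nodup_length_le_of_inR n (P.map Prod.snd) HP.nodupSnd (by
        intro x hx
        obtain ⟨pr, hpr, rfl⟩ := List.mem_map.1 hx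
        exact hkrB _ (HP.keysMem pr hpr).2)
      simpa using this
    have hlenexp : (expC P root (root, root)).length = P.length + 1 := by
      rw [exp_unfold P root (buildGraphB edges).keys HP root root (Or.inl rfl)]
      rw [List.length_append]
      rw [(coreE_perm P root (buildGraphB edges).keys HP).length_eq]
      simp
    have hfuel : 2 * n + 2 =
        (2 * n + 2 - 2 * (expC P root (root, root)).length) +
          2 * (expC P root (root, root)).length := by
      rw [hlenexp]; omega
    have hdfs := dfs_run P root (buildGraphB edges).keys HP (buildChildren P) hch
      (mE P root root) root (Or.inl rfl) le_rfl root []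
      (0, a) (2 * n + 2 - 2 * (expC P root (root, root)).length)
    rw [show 2 * n + 2 = (2 * n + 2 - 2 * (expC P root (root, root)).length) +
      2 * (expC P root (root, root)).length from hfuel, hdfs, dfs_nil]
    -- the final sentinel exit is a no-op
    have hsplit : (expC P root (root, root)).foldl (stepC root) (0, a) =
        (coreE P root root).foldl (stepC root) (0, a) := by
      rw [exp_unfold P root (buildGraphB edges).keys HP root root (Or.inl rfl),
        List.foldl_append]
      simp [stepC]
    rw [hsplit]
    have hBside := foldC_abs n root (coreE P root root) 0 a (fun x => a.getD x.toNat 0)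
      hn.symm
      (fun pr hpr => hPmem pr (coreE_sub P root (buildGraphB edges).keys HP hpr))
      (fun pr hpr => HP.nroot pr (coreE_sub P root (buildGraphB edges).keys HP hpr))
      hArel
    rw [hBside]
    -- order invariance
    have hperm : P.reverse.Perm (coreE P root root) :=
      (List.reverse_perm P).trans (coreE_perm P root (buildGraphB edges).keys HP).symm
    have hv1 := validL_reverse P root (buildGraphB edges).keys HP
    have hv2 := validL_coreE P root (buildGraphB edges).keys HP
    rw [foldl_stepF_perm_valid P.reverse (coreE P root root) (0, fun x => a.getD x.toNat 0)
      hv1 hv2 hperm]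
  · simp [solution, solution_alt, hs]
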